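-- pv_equiv track=rewrite | github.com/ASak1104/code2self | 프로그래머스/lv2/17679. ［1차］ 프렌즈4블록/［1차］ 프렌즈4블록.py | solution
-- ===== SOURCE A (Python) =====
-- def solution(m, n, board):
--     transBoard = [[] for _ in range(n)]
--     for r in range(m - 1, -1, -1):
--         for tr, col in enumerate(board[r]):
--             transBoard[tr].append(col)
--     cleared = clearBlocks(transBoard)
--     while cleared:
--         cleared = clearBlocks(transBoard)
--     return sum(m - len(row) for row in transBoard)
--
-- def clearBlocks(board):
--     cleared = False
--     targetRowSet = set()
--     targetList = []
--     for row in range(len(board) - 1):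
--         for col in range(len(board[row]) - 1):
--             if not board[row][col]:
--                 break
--             if isClear(row, col, board):
--                 targetRowSet |= {row, row + 1}
--                 targetList.append((row, col))
--                 cleared = True
--     for row, col in targetList:
--         board[row][col] = None
--         board[row][col + 1] = None
--         board[row + 1][col] = None
--         board[row + 1][col + 1] = None
--     for row in targetRowSet:
--         board[row] = [col for col in board[row] if col]
--     return cleared
--
-- def isClear(r, c, b):
--     if len(b[r]) <= c + 1 or len(b[r + 1]) <= c + 1:
--         return False
--     if b[r][c] != b[r][c + 1]:
--         return False
--     if b[r][c] != b[r + 1][c]: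
--         return False
--     return b[r][c] == b[r + 1][c + 1]
-- ===== SOURCE B (Python) =====
-- def solution(m, n, board):
--     grid = _fallen([[board[r][c] if c < len(board[r]) else None for c in range(n)]
--                     for r in range(m)])
--     while True:
--         hit = {(r, c) for r in range(m - 1) for c in range(n - 1)
--                if grid[r][c] is not None
--                and grid[r][c] == grid[r][c + 1] == grid[r + 1][c] == grid[r + 1][c + 1]}
--         if not hit:
--             return sum(row.count(None) for row in grid)
--         grid = _fallen([[None if (r, c) in hit or (r - 1, c) in hit
--                          or (r, c - 1) in hit or (r - 1, c - 1) in hit else v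
--                          for c, v in enumerate(row)] for r, row in enumerate(grid)])
--
--
-- def _fallen(grid):
--     h = len(grid)
--     w = len(grid[0]) if grid else 0
--     cols = []
--     for c in range(w):
--         stack = [row[c] for row in grid if row[c] is not None]
--         cols.append([None] * (h - len(stack)) + stack)
--     return [[col[r] for col in cols] for r in range(h)]
-- ===== Notes on version B (the rewrite author's own statement) =====
-- stated objective: alternative
-- what changed: B keeps a fixed m x n row-major grid with None holes and an explicit gravity pass (_fallen) that re-settles every column, marks 2x2 squares as a set of top-left grid corners and blanks every cell covered by a hit square, finally counting holes; A instead transposes the board into bottom-up column lists, mutates them in place with None sentinels and compacts only the touched rows, deriving the answer from column lengths.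
-- intended difference: For m < 0 with n > 0 (the board has no rows), A returns the negative phantom count m*n computed from its n empty column lists, while B returns 0, the correct number of removed blocks for an empty board. — e.g. on solution(-1, 1, []): A returns -1, B returns 0
import Mathlib
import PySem

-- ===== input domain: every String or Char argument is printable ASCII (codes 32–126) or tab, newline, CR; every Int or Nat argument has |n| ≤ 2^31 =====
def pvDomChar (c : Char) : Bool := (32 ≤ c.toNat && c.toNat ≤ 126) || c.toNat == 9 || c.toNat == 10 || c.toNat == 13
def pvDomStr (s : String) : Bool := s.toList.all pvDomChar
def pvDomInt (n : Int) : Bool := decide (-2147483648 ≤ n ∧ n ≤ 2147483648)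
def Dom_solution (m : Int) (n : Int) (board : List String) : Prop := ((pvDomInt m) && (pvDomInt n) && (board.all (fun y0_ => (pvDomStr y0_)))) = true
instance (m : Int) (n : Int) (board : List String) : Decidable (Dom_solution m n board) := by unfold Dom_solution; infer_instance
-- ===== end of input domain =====

-- B replaces A's transposed bottom-up column lists (mutated in place with None sentinels, compacting
-- only the touched rows and answering from the column lengths) by a fixed m×n row-major grid with
-- None holes: an explicit gravity pass re-settles every column, 2x2 hits are collected as a set of
-- top-left grid corners, every cell covered by a hit square is blanked, and the answer counts holes.

-- ===== PORT A =====
abbrev PvBrd := List (List (Option Char))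

-- b[r][c] (in range wherever A evaluates it)
def pvGet2A (b : PvBrd) (r c : Int) : Option Char :=
  PySem.List.pyGetD (PySem.List.pyGetD b r []) c none

-- b[r][c] = None
def pvSetA (b : PvBrd) (r c : Int) : PvBrd :=
  PySem.List.pySetD b r (PySem.List.pySetD (PySem.List.pyGetD b r []) c none)

def isClear (r : Int) (c : Int) (b : PvBrd) : Bool :=
  if PySem.List.len (PySem.List.pyGetD b r []) ≤ c + 1 ∨
     PySem.List.len (PySem.List.pyGetD b (r + 1) []) ≤ c + 1 then false
  else if pvGet2A b r c ≠ pvGet2A b r (c + 1) then false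
  else if pvGet2A b r c ≠ pvGet2A b (r + 1) c then false
  else pvGet2A b r c == pvGet2A b (r + 1) (c + 1)

-- the inner 'for col in range(len(board[row]) - 1)' loop, with the 'break' on a falsy cell
def pvInnerA (b : PvBrd) (row : Int) :
    List Int → Bool × PySem.Set Int × List (Int × Int) → Bool × PySem.Set Int × List (Int × Int)
  | [], st => st
  | col :: rest, st =>
    if (pvGet2A b row col).isNone then st
    else
      pvInnerA b row rest
        (if isClear row col b then
          (true, PySem.Set.add (PySem.Set.add st.2.1 row) (row + 1), st.2.2 ++ [(row, col)])
        else st)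

def clearBlocks (b : PvBrd) : Bool × PvBrd :=
  let st := (PySem.List.pyRange 0 (PySem.List.len b - 1) 1).foldl
      (fun st row =>
        pvInnerA b row (PySem.List.pyRange 0 (PySem.List.len (PySem.List.pyGetD b row []) - 1) 1) st)
      (false, PySem.Set.empty, [])
  let b1 := st.2.2.foldl (fun bb p =>
      pvSetA (pvSetA (pvSetA (pvSetA bb p.1 p.2) p.1 (p.2 + 1)) (p.1 + 1) p.2) (p.1 + 1) (p.2 + 1)) b
  let b2 := st.2.1.foldl (fun bb row =>
      PySem.List.pySetD bb row ((PySem.List.pyGetD bb row []).filter (fun x => x.isSome))) b1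
  (st.1, b2)

-- 'while cleared: cleared = clearBlocks(transBoard)'; fuel = cell count always suffices (each round drops ≥ 4 cells)
def pvWhileA : Nat → Bool → PvBrd → PvBrd
  | _, false, b => b
  | 0, true, b => b
  | f + 1, true, b => pvWhileA f (clearBlocks b).1 (clearBlocks b).2

def solution (m : Int) (n : Int) (board : List String) : Int :=
  let trans0 : PvBrd := (PySem.List.pyRange 0 n 1).map (fun _ => ([] : List (Option Char)))
  let trans := (PySem.List.pyRange (m - 1) (-1) (-1)).foldl (fun tb r =>
      (PySem.List.enumerate (PySem.List.pyGetD board r "").toList 0).foldl (fun tb p =>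
        PySem.List.pySetD tb p.1 (PySem.List.pyGetD tb p.1 [] ++ [some p.2])) tb) trans0
  let fuel := trans.foldl (fun s row => s + row.length) 0
  let bf := pvWhileA fuel (clearBlocks trans).1 (clearBlocks trans).2
  bf.foldl (fun s row => s + (m - PySem.List.len row)) 0

-- ===== PORT B =====
-- _fallen(grid): settle every column to the bottom of the fixed-height grid
def pvFallen (grid : List (List (Option Char))) : List (List (Option Char)) :=
  let h : Int := PySem.List.len grid
  let w : Int := if grid.isEmpty then 0 else PySem.List.len (grid.headD [])
  let cols : List (List (Option Char)) :=
    (PySem.List.pyRange 0 w 1).foldl (fun cs c =>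
      let stack := grid.filterMap (fun row =>
        let x := PySem.List.pyGetD row c none
        if x.isSome then some x else none)
      cs ++ [List.replicate (h - PySem.List.len stack).toNat none ++ stack]) []
  (PySem.List.pyRange 0 h 1).map (fun r =>
    cols.map (fun col => PySem.List.pyGetD col r none))

-- the set comprehension of hit top-left corners
def pvHit (m n : Int) (grid : List (List (Option Char))) : PySem.Set (Int × Int) :=
  PySem.Set.ofList ((PySem.List.pyRange 0 (m - 1) 1).flatMap (fun r =>
    (PySem.List.pyRange 0 (n - 1) 1).filterMap (fun c =>
      if (PySem.List.pyGetD (PySem.List.pyGetD grid r []) c none).isSome &&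
         (PySem.List.pyGetD (PySem.List.pyGetD grid r []) c none ==
          PySem.List.pyGetD (PySem.List.pyGetD grid r []) (c + 1) none) &&
         (PySem.List.pyGetD (PySem.List.pyGetD grid r []) (c + 1) none ==
          PySem.List.pyGetD (PySem.List.pyGetD grid (r + 1) []) c none) &&
         (PySem.List.pyGetD (PySem.List.pyGetD grid (r + 1) []) c none ==
          PySem.List.pyGetD (PySem.List.pyGetD grid (r + 1) []) (c + 1) none)
      then some (r, c) else none)))

-- blank every cell covered by one of the hit squares
def pvBlank (hit : PySem.Set (Int × Int)) (grid : List (List (Option Char))) : List (List (Option Char)) :=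
  (PySem.List.enumerate grid 0).map (fun p =>
    (PySem.List.enumerate p.2 0).map (fun q =>
      if PySem.Set.contains hit (p.1, q.1) || PySem.Set.contains hit (p.1 - 1, q.1) ||
         PySem.Set.contains hit (p.1, q.1 - 1) || PySem.Set.contains hit (p.1 - 1, q.1 - 1)
      then none else q.2))

-- 'while True: … if not hit: return …'; fuel = count of filled cells + 1 always suffices
def pvLoopG (m n : Int) : Nat → List (List (Option Char)) → Int
  | 0, _ => 0
  | f + 1, grid =>
    let hit := pvHit m n grid
    if hit.isEmpty then
      grid.foldl (fun s row => s + (PySem.List.count row none : Int)) 0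
    else pvLoopG m n f (pvFallen (pvBlank hit grid))

def solution_alt (m : Int) (n : Int) (board : List String) : Int :=
  let grid0 : List (List (Option Char)) := (PySem.List.pyRange 0 m 1).map (fun r =>
    let row := PySem.List.pyGetD board r ""
    (PySem.List.pyRange 0 n 1).map (fun c =>
      if c < PySem.Str.len row then some (PySem.List.pyGetD row.toList c ' ') else none))
  let grid := pvFallen grid0
  let fuel := grid.foldl (fun s row => s + (row.filter (fun x => x.isSome)).length) 0 + 1
  pvLoopG m n fuel grid

-- ===== PRECONDITION & SPEC =====
-- Pre_ excludes exactly the inputs on which A raises IndexError: m > len(board) (board[r] out of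
-- range), or one of the first m rows longer than n (its chars then index past the n column lists).
def Pre_solution (m : Int) (n : Int) (board : List String) : Prop :=
  m ≤ PySem.List.len board ∧ ∀ s ∈ board.take m.toNat, PySem.Str.len s ≤ max n 0
instance (m : Int) (n : Int) (board : List String) : Decidable (Pre_solution m n board) := by
  unfold Pre_solution; infer_instance

def pvWitness_solution : Int × Int × List String := (2, 3, ["AAB", "AAB"])

-- For m < 0 with n > 0 (the board has no rows), A returns the negative phantom count m*n computed
-- from its n empty column lists, while B returns 0, the correct count for an empty board.
def D_solution (m : Int) (n : Int) (board : List String) : Prop := m < 0 ∧ 0 < n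
instance (m : Int) (n : Int) (board : List String) : Decidable (D_solution m n board) := by
  unfold D_solution; infer_instance

def Spec_solution (m : Int) (n : Int) (board : List String) (out : Int) : Prop :=
  ¬ D_solution m n board → out = solution_alt m n board
instance (m : Int) (n : Int) (board : List String) (out : Int) : Decidable (Spec_solution m n board out) := by unfold Spec_solution; infer_instance

def pvDiffWitness_solution : Int × Int × List String := (-1, 1, [])
def pvDiffWitnessOut_solution : Int × Int := (-1, 0)

-- ===== CLAIM (what is proved, stated in full; the proofs are below) =====
def Claim_unchanged_solution : Prop := ∀ (m : Int) (n : Int) (board : List String), Dom_solution m n board → Pre_solution m n board → Spec_solution m n board (solution m n board)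
def Claim_changed_solution : Prop := Dom_solution (pvDiffWitness_solution.1) (pvDiffWitness_solution.2.1) (pvDiffWitness_solution.2.2) ∧ Pre_solution (pvDiffWitness_solution.1) (pvDiffWitness_solution.2.1) (pvDiffWitness_solution.2.2) ∧ D_solution (pvDiffWitness_solution.1) (pvDiffWitness_solution.2.1) (pvDiffWitness_solution.2.2) ∧ solution (pvDiffWitness_solution.1) (pvDiffWitness_solution.2.1) (pvDiffWitness_solution.2.2) = pvDiffWitnessOut_solution.1 ∧ solution_alt (pvDiffWitness_solution.1) (pvDiffWitness_solution.2.1) (pvDiffWitness_solution.2.2) = pvDiffWitnessOut_solution.2 ∧ pvDiffWitnessOut_solution.1 ≠ pvDiffWitnessOut_solution.2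
def Claim_exact_solution : Prop := ∀ (m : Int) (n : Int) (board : List String), Dom_solution m n board → Pre_solution m n board → D_solution m n board → solution m n board ≠ solution_alt m n board

-- ===== LEMMAS AND PROOFS =====

-- ---- the pure column model both ports are reduced to ----
def pvEmb (cols : List (List Char)) : PvBrd := cols.map (fun col => col.map some)

def pvMarked (cols : List (List Char)) : PySem.Set (Int × Int) :=
  (PySem.List.pyRange 0 (PySem.List.len cols - 1) 1).foldl (fun mk c =>
    let a := PySem.List.pyGetD cols c []
    let b := PySem.List.pyGetD cols (c + 1) []
    (PySem.List.pyRange 0 (min (PySem.List.len a) (PySem.List.len b) - 1) 1).foldl (fun mk i =>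
      if PySem.List.pyGetD a i ' ' == PySem.List.pyGetD a (i + 1) ' ' &&
         PySem.List.pyGetD a (i + 1) ' ' == PySem.List.pyGetD b i ' ' &&
         PySem.List.pyGetD b i ' ' == PySem.List.pyGetD b (i + 1) ' ' then
        PySem.Set.update mk [(c, i), (c, i + 1), (c + 1, i), (c + 1, i + 1)]
      else mk) mk) PySem.Set.empty

def pvStep (cols : List (List Char)) : Option (List (List Char)) :=
  let mk := pvMarked cols
  if mk.isEmpty then none
  else some ((PySem.List.enumerate cols 0).map (fun p =>
    ((PySem.List.enumerate p.2 0).filter (fun q => !(PySem.Set.contains mk (p.1, q.1)))).map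
      (fun q => q.2)))

def pvLoopB : Nat → List (List Char) → List (List Char)
  | 0, cols => cols
  | f + 1, cols =>
    match pvStep cols with
    | none => cols
    | some c2 => pvLoopB f c2

-- the result of one model round (identity when no square matches)
def pvStepRes (cols : List (List Char)) : List (List Char) := (pvStep cols).getD cols

-- a matching 2x2 square with corner at column r, bottom-up height i
def pvSq (cols : List (List Char)) (r i : Nat) : Bool :=
  decide (i + 1 < (cols.getD r []).length) && decide (i + 1 < (cols.getD (r + 1) []).length) &&
  ((cols.getD r [])[i]? == (cols.getD r [])[i + 1]?) &&
  ((cols.getD r [])[i]? == (cols.getD (r + 1) [])[i]?) &&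
  ((cols.getD r [])[i]? == (cols.getD (r + 1) [])[i + 1]?)

-- cell (r, i) belongs to some matching square
def pvCov (cols : List (List Char)) (r i : Nat) : Prop :=
  ∃ r' i' : Nat, pvSq cols r' i' = true ∧ r' + 1 < cols.length ∧
    (r = r' ∨ r = r' + 1) ∧ (i = i' ∨ i = i' + 1)

-- cell (r, i) is covered by a pair of the target list
def pvCovL (L : List (Int × Int)) (r i : Nat) : Bool :=
  L.any (fun p => (p.1 == (r : Int) || p.1 + 1 == (r : Int)) && (p.2 == (i : Int) || p.2 + 1 == (i : Int)))

-- A's scan order: all (row, col) pairs the marking loops visit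
def pvScanPairs (b : PvBrd) : List (Int × Int) :=
  (PySem.List.pyRange 0 (PySem.List.len b - 1) 1).flatMap (fun r =>
    (PySem.List.pyRange 0 (PySem.List.len (PySem.List.pyGetD b r []) - 1) 1).map (fun c => (r, c)))

def pvTl (b : PvBrd) : List (Int × Int) := (pvScanPairs b).filter (fun p => isClear p.1 p.2 b)

-- basic bridges
theorem pvEmb_getD (cols : List (List Char)) (r : Nat) :
    (pvEmb cols).getD r [] = (cols.getD r []).map some := by
  simp only [pvEmb, List.getD_eq_getElem?_getD, List.getElem?_map]
  cases (cols[r]?) <;> simp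

theorem pvEmb_length (cols : List (List Char)) : (pvEmb cols).length = cols.length := by
  simp [pvEmb]

theorem pvGet2A_emb (cols : List (List Char)) (r i : Nat) :
    pvGet2A (pvEmb cols) (r : Int) (i : Int) = (cols.getD r [])[i]? := by
  simp only [pvGet2A, PySem.List.pyGetD_natCast]
  rw [pvEmb_getD]
  simp only [List.getD_eq_getElem?_getD, List.getElem?_map]
  generalize ((cols[r]?.getD [])[i]?) = o
  cases o <;> rfl

theorem isClear_emb (cols : List (List Char)) (r i : Nat) :
    isClear (r : Int) (i : Int) (pvEmb cols) = pvSq cols r i := by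
  have hr1 : ((r : Int) + 1) = ((r + 1 : Nat) : Int) := by push_cast; ring
  have hi1 : ((i : Int) + 1) = ((i + 1 : Nat) : Int) := by push_cast; ring
  unfold isClear pvSq
  rw [hr1, hi1, pvGet2A_emb, pvGet2A_emb, pvGet2A_emb, pvGet2A_emb]
  simp only [PySem.List.pyGetD_natCast, pvEmb_getD, PySem.List.len_eq, List.length_map]
  by_cases h1 : i + 1 < (cols.getD r []).length
  · by_cases h2 : i + 1 < (cols.getD (r + 1) []).length
    · rw [if_neg (by push_cast; omega)]
      simp only [h1, h2, decide_true, Bool.true_and, ne_eq, beq_iff_eq]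
      split_ifs <;> simp_all
    · rw [if_pos (by push_cast; omega)]
      simp only [List.getD_eq_getElem?_getD] at h2
      simp [h2]
  · rw [if_pos (by push_cast; omega)]
    simp only [List.getD_eq_getElem?_getD] at h1
    simp [h1]

-- generic fold-membership helper
theorem mem_foldl_iff {α β : Type} (f : List α → β → List α) (Q : β → α → Prop)
    (hf : ∀ s y x, x ∈ f s y ↔ x ∈ s ∨ Q y x) :
    ∀ (L : List β) (s0 : List α) (x : α), x ∈ L.foldl f s0 ↔ x ∈ s0 ∨ ∃ y ∈ L, Q y x := by
  intro L
  induction L with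
  | nil => simp
  | cons y L ih =>
    intro s0 x
    simp only [List.foldl_cons, ih, hf]
    constructor
    · rintro (( h | h) | ⟨y', hy', h⟩)
      · exact Or.inl h
      · exact Or.inr ⟨y, by simp, h⟩
      · exact Or.inr ⟨y', by simp [hy'], h⟩
    · rintro (h | ⟨y', hy', h⟩)
      · exact Or.inl (Or.inl h)
      · rcases List.mem_cons.1 hy' with rfl | hy'
        · exact Or.inl (Or.inr h)
        · exact Or.inr ⟨y', hy', h⟩

-- the guard tested at one scan position, under in-range hypotheses, is pvSq
theorem cond_iff_pvSq (cols : List (List Char)) (r s : Nat)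
    (h1 : s + 1 < (cols.getD r []).length) (h2 : s + 1 < (cols.getD (r + 1) []).length) :
    ((PySem.List.pyGetD (PySem.List.pyGetD cols (r : Int) []) (s : Int) ' ' ==
        PySem.List.pyGetD (PySem.List.pyGetD cols (r : Int) []) ((s : Int) + 1) ' ') &&
     (PySem.List.pyGetD (PySem.List.pyGetD cols (r : Int) []) ((s : Int) + 1) ' ' ==
        PySem.List.pyGetD (PySem.List.pyGetD cols ((r : Int) + 1) []) (s : Int) ' ') &&
     (PySem.List.pyGetD (PySem.List.pyGetD cols ((r : Int) + 1) []) (s : Int) ' ' ==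
        PySem.List.pyGetD (PySem.List.pyGetD cols ((r : Int) + 1) []) ((s : Int) + 1) ' '))
    = pvSq cols r s := by
  have hr1 : ((r : Int) + 1) = ((r + 1 : Nat) : Int) := by push_cast; ring
  have hs1 : ((s : Int) + 1) = ((s + 1 : Nat) : Int) := by push_cast; ring
  rw [hr1, hs1]
  simp only [PySem.List.pyGetD_natCast]
  unfold pvSq
  obtain ⟨a1, ha1⟩ : ∃ c, (cols.getD r [])[s]? = some c := ⟨_, List.getElem?_eq_getElem (by omega)⟩
  obtain ⟨a2, ha2⟩ : ∃ c, (cols.getD r [])[s + 1]? = some c := ⟨_, List.getElem?_eq_getElem (by omega)⟩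
  obtain ⟨b1, hb1⟩ : ∃ c, (cols.getD (r + 1) [])[s]? = some c := ⟨_, List.getElem?_eq_getElem (by omega)⟩
  obtain ⟨b2, hb2⟩ : ∃ c, (cols.getD (r + 1) [])[s + 1]? = some c := ⟨_, List.getElem?_eq_getElem (by omega)⟩
  have e1 : (cols.getD r []).getD s ' ' = a1 := by rw [List.getD_eq_getElem?_getD, ha1]; rfl
  have e2 : (cols.getD r []).getD (s + 1) ' ' = a2 := by rw [List.getD_eq_getElem?_getD, ha2]; rfl
  have e3 : (cols.getD (r + 1) []).getD s ' ' = b1 := by rw [List.getD_eq_getElem?_getD, hb1]; rfl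
  have e4 : (cols.getD (r + 1) []).getD (s + 1) ' ' = b2 := by rw [List.getD_eq_getElem?_getD, hb2]; rfl
  simp only [e1, e2, e3, e4, ha1, ha2, hb1, hb2, h1, h2, decide_true, Bool.true_and,
    beq_iff_eq, Option.some.injEq]
  rw [Bool.eq_iff_iff]
  simp only [Bool.and_eq_true, beq_iff_eq, Option.some.injEq]
  constructor <;> rintro ⟨⟨u1, u2⟩, u3⟩ <;> refine ⟨⟨u1, ?_⟩, ?_⟩ <;> simp_all

-- membership in the model's marked set
theorem mem_pvMarked (cols : List (List Char)) (x : Int × Int) :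
    x ∈ pvMarked cols ↔ ∃ r i : Nat, pvSq cols r i = true ∧ r + 1 < cols.length ∧
      (x = ((r : Int), (i : Int)) ∨ x = ((r : Int), (i : Int) + 1) ∨
       x = ((r : Int) + 1, (i : Int)) ∨ x = ((r : Int) + 1, (i : Int) + 1)) := by
  unfold pvMarked
  rw [mem_foldl_iff _
    (fun c x => ∃ i ∈ PySem.List.pyRange 0
        (min (PySem.List.len (PySem.List.pyGetD cols c []))
             (PySem.List.len (PySem.List.pyGetD cols (c + 1) [])) - 1) 1,
      ((PySem.List.pyGetD (PySem.List.pyGetD cols c []) i ' ' ==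
          PySem.List.pyGetD (PySem.List.pyGetD cols c []) (i + 1) ' ') &&
       (PySem.List.pyGetD (PySem.List.pyGetD cols c []) (i + 1) ' ' ==
          PySem.List.pyGetD (PySem.List.pyGetD cols (c + 1) []) i ' ') &&
       (PySem.List.pyGetD (PySem.List.pyGetD cols (c + 1) []) i ' ' ==
          PySem.List.pyGetD (PySem.List.pyGetD cols (c + 1) []) (i + 1) ' ')) = true ∧
      x ∈ [(c, i), (c, i + 1), (c + 1, i), (c + 1, i + 1)])
    ?hf]
  case hf =>
    intro s y x
    rw [mem_foldl_iff _
      (fun i x =>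
        ((PySem.List.pyGetD (PySem.List.pyGetD cols y []) i ' ' ==
            PySem.List.pyGetD (PySem.List.pyGetD cols y []) (i + 1) ' ') &&
         (PySem.List.pyGetD (PySem.List.pyGetD cols y []) (i + 1) ' ' ==
            PySem.List.pyGetD (PySem.List.pyGetD cols (y + 1) []) i ' ') &&
         (PySem.List.pyGetD (PySem.List.pyGetD cols (y + 1) []) i ' ' ==
            PySem.List.pyGetD (PySem.List.pyGetD cols (y + 1) []) (i + 1) ' ')) = true ∧
        x ∈ [(y, i), (y, i + 1), (y + 1, i), (y + 1, i + 1)])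
      ?hg]
    case hg =>
      intro s2 i x2
      by_cases hc : ((PySem.List.pyGetD (PySem.List.pyGetD cols y []) i ' ' ==
            PySem.List.pyGetD (PySem.List.pyGetD cols y []) (i + 1) ' ') &&
         (PySem.List.pyGetD (PySem.List.pyGetD cols y []) (i + 1) ' ' ==
            PySem.List.pyGetD (PySem.List.pyGetD cols (y + 1) []) i ' ') &&
         (PySem.List.pyGetD (PySem.List.pyGetD cols (y + 1) []) i ' ' ==
            PySem.List.pyGetD (PySem.List.pyGetD cols (y + 1) []) (i + 1) ' ')) = true
      · simp only [hc, if_pos]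
        simp [PySem.Set.mem_update, hc]
        tauto
      · simp only [Bool.not_eq_true] at hc
        simp [hc]
  · constructor
    · rintro (hx | ⟨c, hc, i, hi, hcond, hmem⟩)
      · simp [PySem.Set.empty] at hx
      · rw [PySem.List.mem_pyRange_one] at hc hi
        simp only [PySem.List.len_eq] at hc hi
        obtain ⟨hc0, hcU⟩ := hc
        obtain ⟨hi0, hiU⟩ := hi
        have hc2 : c = ((c.toNat : Nat) : Int) := by omega
        have hi2 : i = ((i.toNat : Nat) : Int) := by omega
        rw [hc2, hi2] at hcond hmem hiU
        simp only [PySem.List.pyGetD_natCast, List.length_map] at hcond hmem hiU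
        have hcast : ((c.toNat : Int) + 1) = ((c.toNat + 1 : Nat) : Int) := by push_cast; ring
        rw [hcast] at hcond hiU
        simp only [PySem.List.pyGetD_natCast] at hcond hiU
        have h1 : i.toNat + 1 < (cols.getD c.toNat []).length := by omega
        have h2 : i.toNat + 1 < (cols.getD (c.toNat + 1) []).length := by omega
        refine ⟨c.toNat, i.toNat, ?_, by omega, ?_⟩
        · rw [← cond_iff_pvSq cols c.toNat i.toNat h1 h2]
          simp only [PySem.List.pyGetD_natCast, hcast]
          exact hcond
        · simp only [List.mem_cons, List.not_mem_nil, or_false] at hmem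
          tauto
    · rintro ⟨r, i, hsq, hr, hx⟩
      right
      have h1' : i + 1 < (cols[r]?.getD []).length := by
        unfold pvSq at hsq; simp at hsq; omega
      have h2' : i + 1 < (cols[r + 1]?.getD []).length := by
        unfold pvSq at hsq; simp at hsq; omega
      have h1 : i + 1 < (cols.getD r []).length := by
        simpa [List.getD_eq_getElem?_getD] using h1'
      have h2 : i + 1 < (cols.getD (r + 1) []).length := by
        simpa [List.getD_eq_getElem?_getD] using h2'
      refine ⟨(r : Int), ?_, (i : Int), ?_, ?_, ?_⟩
      · rw [PySem.List.mem_pyRange_one]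
        simp only [PySem.List.len_eq, List.getD_eq_getElem?_getD]
        omega
      · rw [PySem.List.mem_pyRange_one]
        simp only [PySem.List.len_eq, PySem.List.pyGetD_natCast]
        rw [show ((r : Int) + 1) = ((r + 1 : Nat) : Int) from by push_cast; ring]
        simp only [PySem.List.pyGetD_natCast, List.getD_eq_getElem?_getD]
        omega
      · push_cast
        rw [cond_iff_pvSq cols r i h1 h2]
        exact hsq
      · simp only [List.mem_cons, List.not_mem_nil, or_false]
        tauto

-- membership in A's target list
theorem mem_pvTl (cols : List (List Char)) (p : Int × Int) :
    p ∈ pvTl (pvEmb cols) ↔ ∃ r i : Nat, p = ((r : Int), (i : Int)) ∧ r + 1 < cols.length ∧ pvSq cols r i = true := by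
  unfold pvTl pvScanPairs
  rw [List.mem_filter, List.mem_flatMap]
  constructor
  · rintro ⟨⟨r, hr, hp⟩, hclear⟩
    rw [List.mem_map] at hp
    obtain ⟨c, hc, rfl⟩ := hp
    rw [PySem.List.mem_pyRange_one] at hr hc
    simp only [PySem.List.len_eq, pvEmb_length] at hr
    have hr2 : r = ((r.toNat : Nat) : Int) := by omega
    have hc2 : c = ((c.toNat : Nat) : Int) := by omega
    rw [hr2, hc2] at hclear
    rw [isClear_emb] at hclear
    exact ⟨r.toNat, c.toNat, by rw [Prod.ext_iff]; constructor <;> simp <;> omega, by omega, hclear⟩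
  · rintro ⟨r, i, rfl, hr, hsq⟩
    have h1 : i + 1 < (cols[r]?.getD []).length := by
      unfold pvSq at hsq; simp at hsq; omega
    refine ⟨⟨(r : Int), ?_, ?_⟩, ?_⟩
    · rw [PySem.List.mem_pyRange_one]
      simp only [PySem.List.len_eq, pvEmb_length]
      omega
    · rw [List.mem_map]
      refine ⟨(i : Int), ?_, rfl⟩
      rw [PySem.List.mem_pyRange_one]
      simp only [PySem.List.len_eq]
      rw [show (PySem.List.pyGetD (pvEmb cols) ((r : Nat) : Int) []) = (pvEmb cols).getD r []
        from PySem.List.pyGetD_natCast _ _ _, pvEmb_getD]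
      simp only [List.length_map, List.getD_eq_getElem?_getD]
      omega
    · rw [isClear_emb]
      exact hsq

-- A's inner marking loop never breaks on an embedded board
theorem pvInnerA_no_break (b : PvBrd) (row : Int) (cl : List Int)
    (h : ∀ col ∈ cl, (pvGet2A b row col).isSome = true) :
    ∀ st, pvInnerA b row cl st =
      cl.foldl (fun st col =>
        if isClear row col b then
          (true, PySem.Set.add (PySem.Set.add st.2.1 row) (row + 1), st.2.2 ++ [(row, col)])
        else st) st := by
  induction cl with
  | nil => intro st; rfl
  | cons col rest ih =>
    intro st
    have hs : (pvGet2A b row col).isNone = false := by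
      have := h col (by simp)
      cases hx : pvGet2A b row col <;> simp_all
    unfold pvInnerA
    rw [hs]
    simp only [Bool.false_eq_true, if_false, List.foldl_cons]
    exact ih (fun c hc => h c (by simp [hc])) _

-- the marking fold over an arbitrary list of scan positions
theorem markFold (b : PvBrd) (ps : List (Int × Int)) :
    ∀ st : Bool × PySem.Set Int × List (Int × Int),
    ps.foldl (fun st p =>
        if isClear p.1 p.2 b then
          (true, PySem.Set.add (PySem.Set.add st.2.1 p.1) (p.1 + 1), st.2.2 ++ [p])
        else st) st
    = (st.1 || !(ps.filter (fun p => isClear p.1 p.2 b)).isEmpty,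
       (ps.filter (fun p => isClear p.1 p.2 b)).foldl
         (fun s p => PySem.Set.add (PySem.Set.add s p.1) (p.1 + 1)) st.2.1,
       st.2.2 ++ ps.filter (fun p => isClear p.1 p.2 b)) := by
  induction ps with
  | nil => intro st; simp
  | cons p rest ih =>
    intro st
    by_cases hp : isClear p.1 p.2 b
    · rw [List.foldl_cons, if_pos hp, ih]
      simp only [List.filter_cons, hp, if_true, Prod.mk.injEq]
      refine ⟨by simp, by rw [List.foldl_cons], by simp⟩
    · have hp' : isClear p.1 p.2 b = false := by simpa using hp
      rw [List.foldl_cons, if_neg hp, ih]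
      simp only [List.filter_cons, hp', Bool.false_eq_true, if_false]

theorem foldl_flatMap' {α β γ : Type} (l : List α) (f : α → List β) (g : γ → β → γ) :
    ∀ init, (l.flatMap f).foldl g init = l.foldl (fun acc x => (f x).foldl g acc) init := by
  induction l with
  | nil => intro init; rfl
  | cons x l ih => intro init; simp only [List.flatMap_cons, List.foldl_append, List.foldl_cons, ih]

-- covered-by-targets = covered-by-marked
theorem pvCovL_iff (cols : List (List Char)) (r i : Nat) :
    pvCovL (pvTl (pvEmb cols)) r i = true ↔ pvCov cols r i := by
  unfold pvCovL pvCov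
  rw [List.any_eq_true]
  constructor
  · rintro ⟨p, hp, hpred⟩
    rw [mem_pvTl] at hp
    obtain ⟨r', i', rfl, hr', hsq⟩ := hp
    simp only [beq_iff_eq, Bool.and_eq_true, Bool.or_eq_true] at hpred
    exact ⟨r', i', hsq, hr', by omega, by omega⟩
  · rintro ⟨r', i', hsq, hr', hor1, hor2⟩
    refine ⟨((r' : Int), (i' : Int)), (mem_pvTl _ _).2 ⟨r', i', rfl, hr', hsq⟩, ?_⟩
    simp only [beq_iff_eq, Bool.and_eq_true, Bool.or_eq_true]
    constructor <;> omega

theorem mem_pvMarked_iff_cov (cols : List (List Char)) (r i : Nat) :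
    ((r : Int), (i : Int)) ∈ pvMarked cols ↔ pvCov cols r i := by
  rw [mem_pvMarked]
  unfold pvCov
  constructor
  · rintro ⟨r', i', hsq, hr', hor⟩
    refine ⟨r', i', hsq, hr', ?_, ?_⟩ <;>
      · simp only [Prod.mk.injEq] at hor
        omega
  · rintro ⟨r', i', hsq, hr', hor1, hor2⟩
    refine ⟨r', i', hsq, hr', ?_⟩
    simp only [Prod.mk.injEq]
    omega

theorem pvMarked_nil_iff (cols : List (List Char)) :
    pvMarked cols = [] ↔ pvTl (pvEmb cols) = [] := by
  rw [List.eq_nil_iff_forall_not_mem, List.eq_nil_iff_forall_not_mem]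
  constructor
  · intro h p hp
    rw [mem_pvTl] at hp
    obtain ⟨r', i', rfl, hr', hsq⟩ := hp
    exact h ((r' : Int), (i' : Int)) ((mem_pvMarked _ _).2 ⟨r', i', hsq, hr', Or.inl rfl⟩)
  · intro h x hx
    rw [mem_pvMarked] at hx
    obtain ⟨r', i', hsq, hr', -⟩ := hx
    exact h ((r' : Int), (i' : Int)) ((mem_pvTl _ _).2 ⟨r', i', rfl, hr', hsq⟩)

-- getD/set helper
theorem getD_set {α : Type} (l : List α) (k : Nat) (v : α) (r : Nat) (d : α) :
    (l.set k v).getD r d = if r = k ∧ k < l.length then v else l.getD r d := by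
  simp only [List.getD_eq_getElem?_getD, List.getElem?_set]
  by_cases h1 : r = k
  · subst h1
    by_cases h2 : r < l.length <;> simp [h2]
  · rw [if_neg (by omega : ¬ k = r)]
    simp [h1]

-- one 2x2 blanking, characterized cellwise
theorem set4_spec (b : PvBrd) (r i : Nat) (hr : r + 1 < b.length)
    (hi1 : i + 1 < (b.getD r []).length) (hi2 : i + 1 < (b.getD (r + 1) []).length) :
    (pvSetA (pvSetA (pvSetA (pvSetA b (r : Int) (i : Int)) (r : Int) ((i : Int) + 1))
        ((r : Int) + 1) (i : Int)) ((r : Int) + 1) ((i : Int) + 1))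
    = (b.set r (((b.getD r []).set i none).set (i + 1) none)).set (r + 1)
        (((b.getD (r + 1) []).set i none).set (i + 1) none) := by
  have c1 : ((r : Int) + 1) = ((r + 1 : Nat) : Int) := by push_cast; ring
  have c2 : ((i : Int) + 1) = ((i + 1 : Nat) : Int) := by push_cast; ring
  rw [c1, c2]
  have s1 : pvSetA b (r : Int) (i : Int) = b.set r ((b.getD r []).set i none) := by
    simp [pvSetA]
  rw [s1]
  have g1 : (b.set r ((b.getD r []).set i none)).getD r [] = (b.getD r []).set i none := by
    rw [getD_set, if_pos ⟨rfl, by omega⟩]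
  have s2 : pvSetA (b.set r ((b.getD r []).set i none)) (r : Int) ((i + 1 : Nat) : Int)
      = b.set r (((b.getD r []).set i none).set (i + 1) none) := by
    simp only [pvSetA, PySem.List.pySetD_natCast, PySem.List.pyGetD_natCast]
    rw [g1, List.set_set]
  rw [s2]
  have g2 : (b.set r (((b.getD r []).set i none).set (i + 1) none)).getD (r + 1) []
      = b.getD (r + 1) [] := by
    rw [getD_set, if_neg (by omega)]
  have s3 : pvSetA (b.set r (((b.getD r []).set i none).set (i + 1) none))
        ((r + 1 : Nat) : Int) (i : Int)
      = (b.set r (((b.getD r []).set i none).set (i + 1) none)).set (r + 1)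
          ((b.getD (r + 1) []).set i none) := by
    simp only [pvSetA, PySem.List.pySetD_natCast, PySem.List.pyGetD_natCast]
    rw [g2]
  rw [s3]
  have g3 : ((b.set r (((b.getD r []).set i none).set (i + 1) none)).set (r + 1)
        ((b.getD (r + 1) []).set i none)).getD (r + 1) [] = (b.getD (r + 1) []).set i none := by
    rw [getD_set, if_pos ⟨rfl, by simp only [List.length_set]; omega⟩]
  have s4 : pvSetA ((b.set r (((b.getD r []).set i none).set (i + 1) none)).set (r + 1)
        ((b.getD (r + 1) []).set i none)) ((r + 1 : Nat) : Int) ((i + 1 : Nat) : Int)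
      = (b.set r (((b.getD r []).set i none).set (i + 1) none)).set (r + 1)
          (((b.getD (r + 1) []).set i none).set (i + 1) none) := by
    simp only [pvSetA, PySem.List.pySetD_natCast, PySem.List.pyGetD_natCast]
    rw [g3, List.set_set]
  rw [s4]

theorem applySets_spec (L : List (Int × Int)) : ∀ (b : PvBrd),
    (∀ p ∈ L, ∃ r i : Nat, p = ((r : Int), (i : Int)) ∧ r + 1 < b.length ∧
      i + 1 < (b.getD r []).length ∧ i + 1 < (b.getD (r + 1) []).length) →
    ((L.foldl (fun bb p =>
      pvSetA (pvSetA (pvSetA (pvSetA bb p.1 p.2) p.1 (p.2 + 1)) (p.1 + 1) p.2) (p.1 + 1) (p.2 + 1)) b).length = b.length ∧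
    (∀ r : Nat, ((L.foldl (fun bb p =>
      pvSetA (pvSetA (pvSetA (pvSetA bb p.1 p.2) p.1 (p.2 + 1)) (p.1 + 1) p.2) (p.1 + 1) (p.2 + 1)) b).getD r []).length = (b.getD r []).length) ∧
    (∀ r i : Nat, ((L.foldl (fun bb p =>
      pvSetA (pvSetA (pvSetA (pvSetA bb p.1 p.2) p.1 (p.2 + 1)) (p.1 + 1) p.2) (p.1 + 1) (p.2 + 1)) b).getD r []).getD i none =
      if pvCovL L r i then none else (b.getD r []).getD i none)) := by
  induction L with
  | nil =>
    intro b _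
    refine ⟨rfl, fun r => rfl, fun r i => ?_⟩
    simp [pvCovL]
  | cons p L ih =>
    intro b hL
    obtain ⟨r0, i0, rfl, hr0, hi01, hi02⟩ := hL p (by simp)
    rw [List.foldl_cons, set4_spec b r0 i0 hr0 hi01 hi02]
    set b' := (b.set r0 (((b.getD r0 []).set i0 none).set (i0 + 1) none)).set (r0 + 1)
        (((b.getD (r0 + 1) []).set i0 none).set (i0 + 1) none) with hb'
    have hlen : b'.length = b.length := by simp [hb']
    have hrow : ∀ r : Nat, (b'.getD r []).length = (b.getD r []).length := by
      intro r
      rw [hb', getD_set, getD_set]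
      by_cases h1 : r = r0 + 1
      · subst h1; rw [if_pos ⟨rfl, by simp only [List.length_set]; omega⟩]; simp
      · rw [if_neg (by omega)]
        by_cases h2 : r = r0
        · subst h2; rw [if_pos ⟨rfl, by omega⟩]; simp
        · rw [if_neg (by omega)]
    have hcell : ∀ r i : Nat, (b'.getD r []).getD i none =
        if (r = r0 ∨ r = r0 + 1) ∧ (i = i0 ∨ i = i0 + 1) then none else (b.getD r []).getD i none := by
      intro r i
      rw [hb', getD_set, getD_set]
      by_cases h1 : r = r0 + 1
      · subst h1
        rw [if_pos ⟨rfl, by simp only [List.length_set]; omega⟩]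
        rw [getD_set, getD_set]
        by_cases h3 : i = i0 + 1
        · subst h3; rw [if_pos ⟨rfl, by simp only [List.length_set]; omega⟩]; rw [if_pos (by omega)]
        · rw [if_neg (by omega)]
          by_cases h4 : i = i0
          · subst h4; rw [if_pos ⟨rfl, by omega⟩]; rw [if_pos (by omega)]
          · rw [if_neg (by omega), if_neg (by omega)]
      · rw [if_neg (by omega)]
        by_cases h2 : r = r0
        · subst h2
          rw [if_pos ⟨rfl, by omega⟩]
          rw [getD_set, getD_set]
          by_cases h3 : i = i0 + 1
          · subst h3; rw [if_pos ⟨rfl, by simp only [List.length_set]; omega⟩]; rw [if_pos (by omega)]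
          · rw [if_neg (by omega)]
            by_cases h4 : i = i0
            · subst h4; rw [if_pos ⟨rfl, by omega⟩]; rw [if_pos (by omega)]
            · rw [if_neg (by omega), if_neg (by omega)]
        · rw [if_neg (by omega), if_neg (by omega)]
    have hL' : ∀ p ∈ L, ∃ r i : Nat, p = ((r : Int), (i : Int)) ∧ r + 1 < b'.length ∧
        i + 1 < (b'.getD r []).length ∧ i + 1 < (b'.getD (r + 1) []).length := by
      intro q hq
      obtain ⟨r, i, rfl, h1, h2, h3⟩ := hL q (by simp [hq])
      exact ⟨r, i, rfl, by omega, by rw [hrow]; omega, by rw [hrow]; omega⟩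
    obtain ⟨l1, l2, l3⟩ := ih b' hL'
    refine ⟨by rw [l1, hlen], fun r => by rw [l2, hrow], fun r i => ?_⟩
    rw [l3, hcell]
    have hcons : (pvCovL (((r0 : Int), (i0 : Int)) :: L) r i = true) ↔
        (((r = r0 ∨ r = r0 + 1) ∧ (i = i0 ∨ i = i0 + 1)) ∨ pvCovL L r i = true) := by
      unfold pvCovL
      rw [List.any_cons]
      simp only [Bool.or_eq_true, Bool.and_eq_true, beq_iff_eq]
      constructor
      · rintro (⟨h1, h2⟩ | h)
        · left; constructor <;> omega
        · right; exact h
      · rintro (⟨h1, h2⟩ | h)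
        · left; constructor <;> omega
        · right; exact h
    by_cases hA : pvCovL L r i = true
    · rw [if_pos hA, if_pos (hcons.2 (Or.inr hA))]
    · rw [if_neg hA]
      by_cases hB : (r = r0 ∨ r = r0 + 1) ∧ (i = i0 ∨ i = i0 + 1)
      · rw [if_pos hB, if_pos (hcons.2 (Or.inl hB))]
      · rw [if_neg hB, if_neg (fun hc => (hcons.1 hc).elim hB hA)]

-- A's marking phase result
theorem clearBlocks_state (b : PvBrd) (hb : ∀ p ∈ pvScanPairs b, (pvGet2A b p.1 p.2).isSome) :
    ((PySem.List.pyRange 0 (PySem.List.len b - 1) 1).foldl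
      (fun st row =>
        pvInnerA b row (PySem.List.pyRange 0 (PySem.List.len (PySem.List.pyGetD b row []) - 1) 1) st)
      ((false, PySem.Set.empty, []) : Bool × PySem.Set Int × List (Int × Int)))
    = (!(pvTl b).isEmpty,
       (pvTl b).foldl (fun s p => PySem.Set.add (PySem.Set.add s p.1) (p.1 + 1)) PySem.Set.empty,
       pvTl b) := by
  have h1 : ∀ (st : Bool × PySem.Set Int × List (Int × Int)) (row : Int),
      row ∈ PySem.List.pyRange 0 (PySem.List.len b - 1) 1 →
      pvInnerA b row (PySem.List.pyRange 0 (PySem.List.len (PySem.List.pyGetD b row []) - 1) 1) st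
      = ((PySem.List.pyRange 0 (PySem.List.len (PySem.List.pyGetD b row []) - 1) 1).map
          (fun c => (row, c))).foldl
          (fun st p =>
            if isClear p.1 p.2 b then
              (true, PySem.Set.add (PySem.Set.add st.2.1 p.1) (p.1 + 1), st.2.2 ++ [p])
            else st) st := by
    intro st row hrow
    rw [pvInnerA_no_break b row _ (fun col hcol => hb (row, col) (by
      unfold pvScanPairs
      rw [List.mem_flatMap]
      exact ⟨row, hrow, List.mem_map.2 ⟨col, hcol, rfl⟩⟩))]
    rw [List.foldl_map]
  refine ((PySem.List.foldl_congr_mem _ _ _ _ h1).trans ?_)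
  rw [← foldl_flatMap']
  refine (markFold b _ _).trans ?_
  simp [pvTl, pvScanPairs]

-- the compaction fold
theorem applyFilter_spec (L : List Int) (hL : ∀ x ∈ L, 0 ≤ x) :
    ∀ (b : PvBrd) (r : Nat),
      (L.foldl (fun bb row =>
        PySem.List.pySetD bb row ((PySem.List.pyGetD bb row []).filter (fun x => x.isSome))) b).getD r []
      = (if (r : Int) ∈ L then (b.getD r []).filter (fun x => x.isSome) else b.getD r []) ∧
      (L.foldl (fun bb row =>
        PySem.List.pySetD bb row ((PySem.List.pyGetD bb row []).filter (fun x => x.isSome))) b).length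
      = b.length := by
  induction L with
  | nil => intro b r; simp
  | cons x L ih =>
    intro b r
    have hx : 0 ≤ x := hL x (by simp)
    have hL' : ∀ y ∈ L, 0 ≤ y := fun y hy => hL y (by simp [hy])
    have hx2 : x = ((x.toNat : Nat) : Int) := by omega
    rw [List.foldl_cons, hx2]
    simp only [PySem.List.pySetD_natCast, PySem.List.pyGetD_natCast]
    obtain ⟨e1, e2⟩ := ih hL'
      (b.set x.toNat ((b.getD x.toNat []).filter (fun c => c.isSome))) r
    refine ⟨?_, by rw [e2, List.length_set]⟩
    rw [e1]
    by_cases hrx : r = x.toNat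
    · subst hrx
      rw [if_pos List.mem_cons_self]
      by_cases hlen : x.toNat < b.length
      · have hset : (b.set x.toNat ((b.getD x.toNat []).filter (fun c => c.isSome))).getD x.toNat []
            = (b.getD x.toNat []).filter (fun c => c.isSome) := by
          rw [getD_set]; exact if_pos ⟨rfl, hlen⟩
        rw [hset]
        by_cases hmem : ((x.toNat : Nat) : Int) ∈ L
        · rw [if_pos hmem, List.filter_filter]
          simp
        · rw [if_neg hmem]
      · have hset : (b.set x.toNat ((b.getD x.toNat []).filter (fun c => c.isSome))).getD x.toNat []
            = b.getD x.toNat [] := by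
          rw [getD_set]; exact if_neg (by omega)
        rw [hset]
        have hnil : b.getD x.toNat [] = [] := by
          rw [List.getD_eq_getElem?_getD, List.getElem?_eq_none (by omega)]; rfl
        rw [hnil]
        simp
    · have hset : (b.set x.toNat ((b.getD x.toNat []).filter (fun c => c.isSome))).getD r []
          = b.getD r [] := by
        rw [getD_set]; exact if_neg (fun h => hrx h.1)
      rw [hset]
      have hiff : ((r : Int) ∈ ((x.toNat : Nat) : Int) :: L) ↔ ((r : Int) ∈ L) := by
        simp only [List.mem_cons]
        constructor
        · rintro (h | h)
          · exfalso; omega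
          · exact h
        · exact Or.inr
      by_cases hmem : (r : Int) ∈ L
      · rw [if_pos hmem, if_pos (hiff.2 hmem)]
      · rw [if_neg hmem, if_neg (fun h => hmem (hiff.1 h))]

theorem filter_isSome_map_mask (l : List (Int × Char)) (f : Int → Bool) :
    (l.map (fun q => if f q.1 then none else some q.2)).filter (fun x => x.isSome) =
    ((l.filter (fun q => !f q.1)).map (fun q => q.2)).map some := by
  induction l with
  | nil => simp
  | cons q l ih =>
    by_cases h : f q.1 <;> simp [h, ih]

-- ONE ROUND: A's clearBlocks on an embedded column list is the model step
theorem clearBlocks_emb (cols : List (List Char)) :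
    clearBlocks (pvEmb cols) = (!(pvMarked cols).isEmpty, pvEmb (pvStepRes cols)) := by
  have hb : ∀ p ∈ pvScanPairs (pvEmb cols), (pvGet2A (pvEmb cols) p.1 p.2).isSome = true := by
    intro p hp
    unfold pvScanPairs at hp
    rw [List.mem_flatMap] at hp
    obtain ⟨r, hr, hp⟩ := hp
    rw [List.mem_map] at hp
    obtain ⟨c, hc, rfl⟩ := hp
    rw [PySem.List.mem_pyRange_one] at hr hc
    simp only [PySem.List.len_eq, pvEmb_length] at hr
    have hr2 : r = ((r.toNat : Nat) : Int) := by omega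
    have hc2 : c = ((c.toNat : Nat) : Int) := by omega
    rw [hr2] at hc
    simp only [PySem.List.len_eq, PySem.List.pyGetD_natCast, pvEmb_getD, List.length_map] at hc
    rw [hr2, hc2]
    rw [pvGet2A_emb]
    rw [List.getElem?_eq_getElem (by omega)]
    rfl
  have hL : ∀ p ∈ pvTl (pvEmb cols), ∃ r i : Nat, p = ((r : Int), (i : Int)) ∧
      r + 1 < (pvEmb cols).length ∧ i + 1 < ((pvEmb cols).getD r []).length ∧
      i + 1 < ((pvEmb cols).getD (r + 1) []).length := by
    intro p hp
    obtain ⟨r, i, rfl, hr, hsq⟩ := (mem_pvTl cols p).1 hp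
    have h1 : i + 1 < (cols[r]?.getD []).length := by unfold pvSq at hsq; simp at hsq; omega
    have h2 : i + 1 < (cols[r + 1]?.getD []).length := by unfold pvSq at hsq; simp at hsq; omega
    refine ⟨r, i, rfl, by rw [pvEmb_length]; omega, ?_, ?_⟩ <;>
      · rw [pvEmb_getD, List.length_map, List.getD_eq_getElem?_getD]
        omega
  obtain ⟨A1, A2, A3⟩ := applySets_spec (pvTl (pvEmb cols)) (pvEmb cols) hL
  have hrs_mem : ∀ x, x ∈ ((pvTl (pvEmb cols)).foldl
      (fun s p => PySem.Set.add (PySem.Set.add s p.1) (p.1 + 1)) PySem.Set.empty) ↔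
      ∃ p ∈ pvTl (pvEmb cols), x = p.1 ∨ x = p.1 + 1 := by
    intro x
    rw [mem_foldl_iff (fun s p => PySem.Set.add (PySem.Set.add s p.1) (p.1 + 1))
      (fun p x => x = p.1 ∨ x = p.1 + 1)
      (fun s y x => by simp [PySem.Set.mem_add]; tauto) (pvTl (pvEmb cols)) PySem.Set.empty x]
    simp [PySem.Set.empty]
  have hrs0 : ∀ x ∈ ((pvTl (pvEmb cols)).foldl
      (fun s p => PySem.Set.add (PySem.Set.add s p.1) (p.1 + 1)) PySem.Set.empty), 0 ≤ x := by
    intro x hx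
    obtain ⟨p, hp, hor⟩ := (hrs_mem x).1 hx
    obtain ⟨r, i, rfl, -, -⟩ := (mem_pvTl cols p).1 hp
    simp only at hor
    omega
  have hnocov : ∀ r i : Nat, pvCovL (pvTl (pvEmb cols)) r i = true →
      ((r : Int) ∈ ((pvTl (pvEmb cols)).foldl
        (fun s p => PySem.Set.add (PySem.Set.add s p.1) (p.1 + 1)) PySem.Set.empty)) := by
    intro r i h
    unfold pvCovL at h
    rw [List.any_eq_true] at h
    obtain ⟨p, hp, hpred⟩ := h
    simp only [Bool.and_eq_true, Bool.or_eq_true, beq_iff_eq] at hpred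
    refine (hrs_mem _).2 ⟨p, hp, ?_⟩
    omega
  have hcov : ∀ r i : Nat, (pvCovL (pvTl (pvEmb cols)) r i = true) ↔
      (PySem.Set.contains (pvMarked cols) ((r : Int), (i : Int)) = true) := by
    intro r i
    rw [pvCovL_iff, PySem.Set.contains_iff, mem_pvMarked_iff_cov]
  -- the blanked row, as a masked map
  have row_b1 : ∀ r : Nat, r < cols.length →
      ((pvTl (pvEmb cols)).foldl (fun bb p =>
        pvSetA (pvSetA (pvSetA (pvSetA bb p.1 p.2) p.1 (p.2 + 1)) (p.1 + 1) p.2) (p.1 + 1) (p.2 + 1))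
        (pvEmb cols)).getD r []
      = (PySem.List.enumerate (cols.getD r []) 0).map
          (fun q => if PySem.Set.contains (pvMarked cols) ((r : Int), q.1) then none else some q.2) := by
    intro r hrlen
    have hlen1 : (((pvTl (pvEmb cols)).foldl (fun bb p =>
        pvSetA (pvSetA (pvSetA (pvSetA bb p.1 p.2) p.1 (p.2 + 1)) (p.1 + 1) p.2) (p.1 + 1) (p.2 + 1))
        (pvEmb cols)).getD r []).length = (cols.getD r []).length := by
      rw [A2 r, pvEmb_getD, List.length_map]
    apply List.ext_getElem
    · rw [hlen1, List.length_map, PySem.List.length_enumerate]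
    intro k hk1 hk2
    have hkcol : k < (cols.getD r []).length := by rwa [hlen1] at hk1
    have lhs : (((pvTl (pvEmb cols)).foldl (fun bb p =>
        pvSetA (pvSetA (pvSetA (pvSetA bb p.1 p.2) p.1 (p.2 + 1)) (p.1 + 1) p.2) (p.1 + 1) (p.2 + 1))
        (pvEmb cols)).getD r [])[k]
        = if pvCovL (pvTl (pvEmb cols)) r k then none else some ((cols.getD r [])[k]) := by
      rw [← List.getD_eq_getElem _ none hk1, A3 r k]
      by_cases hcv : pvCovL (pvTl (pvEmb cols)) r k = true
      · rw [if_pos hcv, if_pos hcv]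
      · rw [if_neg hcv, if_neg hcv, pvEmb_getD]
        rw [List.getD_eq_getElem _ _ (by rw [List.length_map]; exact hkcol)]
        rw [List.getElem_map]
    rw [lhs, List.getElem_map, PySem.List.getElem_enumerate]
    simp only [Int.zero_add]
    by_cases hcv : pvCovL (pvTl (pvEmb cols)) r k = true
    · rw [if_pos hcv, if_pos ((hcov r k).1 hcv)]
    · rw [if_neg hcv, if_neg (fun h => hcv ((hcov r k).2 h))]
  -- one round acts as the model step on every row
  have hrow : ∀ r : Nat, r < cols.length →
      (((pvTl (pvEmb cols)).foldl
        (fun s p => PySem.Set.add (PySem.Set.add s p.1) (p.1 + 1)) PySem.Set.empty).foldl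
          (fun bb row => PySem.List.pySetD bb row
            ((PySem.List.pyGetD bb row []).filter (fun x => x.isSome)))
          ((pvTl (pvEmb cols)).foldl (fun bb p =>
            pvSetA (pvSetA (pvSetA (pvSetA bb p.1 p.2) p.1 (p.2 + 1)) (p.1 + 1) p.2) (p.1 + 1) (p.2 + 1))
            (pvEmb cols))).getD r []
      = (((PySem.List.enumerate (cols.getD r []) 0).filter
            (fun q => !(PySem.Set.contains (pvMarked cols) ((r : Int), q.1)))).map
          (fun q => q.2)).map some := by
    intro r hrlen
    obtain ⟨F1, F2⟩ := applyFilter_spec _ hrs0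
      (((pvTl (pvEmb cols)).foldl (fun bb p =>
        pvSetA (pvSetA (pvSetA (pvSetA bb p.1 p.2) p.1 (p.2 + 1)) (p.1 + 1) p.2) (p.1 + 1) (p.2 + 1))
        (pvEmb cols))) r
    rw [F1]
    by_cases hin : ((r : Int) ∈ ((pvTl (pvEmb cols)).foldl
        (fun s p => PySem.Set.add (PySem.Set.add s p.1) (p.1 + 1)) PySem.Set.empty))
    · rw [if_pos hin, row_b1 r hrlen,
        filter_isSome_map_mask (PySem.List.enumerate (cols.getD r []) 0)
          (fun i => PySem.Set.contains (pvMarked cols) ((r : Int), i))]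
    · rw [if_neg hin, row_b1 r hrlen]
      have hnone : ∀ q ∈ PySem.List.enumerate (cols.getD r []) 0,
          PySem.Set.contains (pvMarked cols) ((r : Int), q.1) = false := by
        intro q hq
        rw [PySem.List.mem_enumerate_iff] at hq
        obtain ⟨k, hk, rfl⟩ := hq
        by_cases hcv : PySem.Set.contains (pvMarked cols) ((r : Int), ((0 : Int) + (k : Nat))) = true
        · exfalso
          apply hin
          apply hnocov r k
          rw [hcov r k]
          simpa using hcv
        · simpa using hcv
      rw [List.map_congr_left (fun q hq => by rw [hnone q hq, if_neg (by simp)])]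
      rw [List.filter_eq_self.2 (fun q hq => by rw [hnone q hq]; rfl)]
      rw [PySem.List.map_snd_enumerate]
      rw [show (fun q : Int × Char => some q.2) = (some ∘ fun q : Int × Char => q.2) from rfl,
        ← List.map_map, PySem.List.map_snd_enumerate]
  -- assemble
  simp only [clearBlocks]
  rw [clearBlocks_state _ hb]
  simp only [Prod.mk.injEq]
  constructor
  · by_cases h : pvMarked cols = []
    · rw [h, (pvMarked_nil_iff cols).1 h]
    · have h2 : pvTl (pvEmb cols) ≠ [] := fun hh => h ((pvMarked_nil_iff cols).2 hh)
      rw [List.isEmpty_eq_false_iff.2 h2, List.isEmpty_eq_false_iff.2 h]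
  · have hlenB : (((pvTl (pvEmb cols)).foldl
        (fun s p => PySem.Set.add (PySem.Set.add s p.1) (p.1 + 1)) PySem.Set.empty).foldl
          (fun bb row => PySem.List.pySetD bb row
            ((PySem.List.pyGetD bb row []).filter (fun x => x.isSome)))
          ((pvTl (pvEmb cols)).foldl (fun bb p =>
            pvSetA (pvSetA (pvSetA (pvSetA bb p.1 p.2) p.1 (p.2 + 1)) (p.1 + 1) p.2) (p.1 + 1) (p.2 + 1))
            (pvEmb cols))).length = cols.length := by
      rw [(applyFilter_spec _ hrs0 _ 0).2, A1, pvEmb_length]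
    apply List.ext_getElem
    · rw [hlenB]
      unfold pvStepRes pvStep
      by_cases h : (pvMarked cols).isEmpty
      · rw [if_pos h]
        simp [pvEmb]
      · rw [if_neg h]
        simp [pvEmb, PySem.List.length_enumerate]
    intro r hr1 hr2
    have hrlen : r < cols.length := by rwa [hlenB] at hr1
    rw [← List.getD_eq_getElem _ [] hr1, hrow r hrlen, ← List.getD_eq_getElem _ [] hr2]
    rw [pvEmb_getD]
    unfold pvStepRes pvStep
    by_cases h : (pvMarked cols).isEmpty
    · rw [if_pos h]
      simp only [Option.getD_none]
      have hemp : pvMarked cols = [] := by rwa [List.isEmpty_iff] at h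
      have hall : ∀ q ∈ PySem.List.enumerate (cols.getD r []) 0,
          (!(PySem.Set.contains (pvMarked cols) ((r : Int), q.1))) = true := by
        intro q hq
        rw [hemp]
        rfl
      rw [List.filter_eq_self.2 hall, PySem.List.map_snd_enumerate]
    · rw [if_neg h]
      simp only [Option.getD_some]
      have hcol : cols.getD r [] = cols[r] := List.getD_eq_getElem _ _ hrlen
      rw [hcol, List.getD_eq_getElem _ _
        (by simp only [List.length_map, PySem.List.length_enumerate]; exact hrlen)]
      simp only [List.getElem_map, PySem.List.getElem_enumerate, Int.zero_add]

-- LOOP: A's flagged while = the model loop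
theorem loop_emb (f : Nat) (cols : List (List Char)) :
    pvWhileA f (clearBlocks (pvEmb cols)).1 (clearBlocks (pvEmb cols)).2 = pvEmb (pvLoopB (f + 1) cols) := by
  induction f generalizing cols with
  | zero =>
    rw [clearBlocks_emb]
    rw [show ∀ x : PvBrd, pvWhileA 0 (!(pvMarked cols).isEmpty) x = x from fun x => by
      cases (pvMarked cols).isEmpty <;> rfl]
    congr 1
    unfold pvStepRes pvLoopB
    cases hs : pvStep cols <;> simp [hs, pvLoopB]
  | succ f ih =>
    rw [clearBlocks_emb]
    cases hmk : (pvMarked cols).isEmpty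
    · show pvWhileA (f + 1) true (pvEmb (pvStepRes cols)) = _
      rw [show pvWhileA (f + 1) true (pvEmb (pvStepRes cols))
          = pvWhileA f (clearBlocks (pvEmb (pvStepRes cols))).1
              (clearBlocks (pvEmb (pvStepRes cols))).2 from rfl]
      rw [ih (pvStepRes cols)]
      congr 1
      cases hs : pvStep cols
      · exfalso
        unfold pvStep at hs
        rw [if_neg (by simp [hmk])] at hs
        simp at hs
      · unfold pvStepRes
        rw [hs]
        conv_rhs => rw [pvLoopB]
        rw [hs]
        rfl
    · show pvWhileA (f + 1) false (pvEmb (pvStepRes cols)) = _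
      rw [show pvWhileA (f + 1) false (pvEmb (pvStepRes cols)) = pvEmb (pvStepRes cols) from rfl]
      congr 1
      have hs : pvStep cols = none := by
        unfold pvStep
        rw [if_pos (by simp [hmk])]
      unfold pvStepRes
      rw [hs]
      conv_rhs => rw [pvLoopB]
      rw [hs]
      rfl

-- BUILD: appending one row string into the columns
def pvAppRow : List (List Char) → Nat → List Char → List (List Char)
  | cc, _, [] => cc
  | cc, s, c :: cs => pvAppRow (cc.set s (cc.getD s [] ++ [c])) (s + 1) cs

theorem innerBuild_emb (cs : List Char) : ∀ (s : Nat) (cc : List (List Char)),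
    (PySem.List.enumerate cs (s : Int)).foldl (fun tb p =>
      PySem.List.pySetD tb p.1 (PySem.List.pyGetD tb p.1 [] ++ [some p.2])) (pvEmb cc)
    = pvEmb (pvAppRow cc s cs) := by
  induction cs with
  | nil => intro s cc; rfl
  | cons ch cs ih =>
    intro s cc
    rw [PySem.List.enumerate_cons, List.foldl_cons]
    have hstep : PySem.List.pySetD (pvEmb cc) (s : Int)
        (PySem.List.pyGetD (pvEmb cc) (s : Int) [] ++ [some ch])
        = pvEmb (cc.set s (cc.getD s [] ++ [ch])) := by
      simp only [PySem.List.pySetD_natCast, PySem.List.pyGetD_natCast, pvEmb_getD]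
      rw [show (cc.getD s []).map some ++ [some ch] = (cc.getD s [] ++ [ch]).map some by
        rw [List.map_append]; rfl]
      simp [pvEmb, List.map_set]
    rw [hstep, show ((s : Int) + 1) = ((s + 1 : Nat) : Int) by push_cast; ring, ih (s + 1)]
    rfl

theorem pvAppRow_length (cs : List Char) : ∀ (s : Nat) (cc : List (List Char)),
    (pvAppRow cc s cs).length = cc.length := by
  induction cs with
  | nil => intro s cc; rfl
  | cons ch cs ih =>
    intro s cc
    rw [show pvAppRow cc s (ch :: cs) = pvAppRow (cc.set s (cc.getD s [] ++ [ch])) (s + 1) cs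
      from rfl, ih]
    simp

theorem pvAppRow_getD (cs : List Char) : ∀ (s : Nat) (cc : List (List Char)) (c : Nat),
    s + cs.length ≤ cc.length →
    (pvAppRow cc s cs).getD c [] =
      if s ≤ c ∧ c < s + cs.length then cc.getD c [] ++ [cs.getD (c - s) ' '] else cc.getD c [] := by
  induction cs with
  | nil =>
    intro s cc c h
    rw [show pvAppRow cc s [] = cc from rfl, if_neg (by simp only [List.length_nil]; omega)]
  | cons ch cs ih =>
    intro s cc c h
    have h' : s + cs.length + 1 ≤ cc.length := by
      simp only [List.length_cons] at h; omega
    rw [show pvAppRow cc s (ch :: cs) = pvAppRow (cc.set s (cc.getD s [] ++ [ch])) (s + 1) cs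
      from rfl]
    rw [ih (s + 1) _ c (by simp only [List.length_set]; omega)]
    have hgd : (cc.set s (cc.getD s [] ++ [ch])).getD c []
        = if c = s then cc.getD s [] ++ [ch] else cc.getD c [] := by
      rw [getD_set]
      by_cases hc : c = s
      · rw [if_pos ⟨hc, by omega⟩, if_pos hc]
      · rw [if_neg (fun hh => hc hh.1), if_neg hc]
    by_cases hc : c = s
    · subst hc
      rw [if_neg (by omega), hgd, if_pos rfl,
        if_pos (by simp only [List.length_cons]; omega)]
      simp
    · by_cases hc2 : s + 1 ≤ c ∧ c < s + 1 + cs.length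
      · rw [if_pos hc2, hgd, if_neg hc,
          if_pos (by simp only [List.length_cons]; omega)]
        have hcs : c - s = (c - (s + 1)) + 1 := by omega
        rw [hcs]
        rfl
      · rw [if_neg hc2, hgd, if_neg hc,
          if_neg (by simp only [List.length_cons]; omega)]

theorem outerBuild (S : List String) : ∀ (cc : List (List Char)),
    (∀ s ∈ S, s.toList.length ≤ cc.length) →
    ∀ c : Nat,
    ((S.foldl (fun cc2 s => pvAppRow cc2 0 s.toList) cc).getD c [] =
      cc.getD c [] ++ S.filterMap (fun s => if c < s.toList.length then some (s.toList.getD c ' ') else none)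
      ∨ cc.length ≤ c) ∧
    (S.foldl (fun cc2 s => pvAppRow cc2 0 s.toList) cc).length = cc.length := by
  induction S with
  | nil => intro cc h c; simp
  | cons s0 S ih =>
    intro cc h c
    rw [List.foldl_cons]
    have hlen0 : s0.toList.length ≤ cc.length := h s0 (by simp)
    have hlen1 : (pvAppRow cc 0 s0.toList).length = cc.length := pvAppRow_length _ _ _
    obtain ⟨ih1, ih2⟩ := ih (pvAppRow cc 0 s0.toList)
      (fun s hs => by rw [hlen1]; exact h s (by simp [hs])) c
    refine ⟨?_, by rw [ih2, hlen1]⟩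
    rcases ih1 with ih1 | ih1
    · by_cases hc : c < cc.length
      · left
        rw [ih1, pvAppRow_getD s0.toList 0 cc c (by omega)]
        rw [List.filterMap_cons]
        by_cases hin : c < s0.toList.length
        · rw [if_pos ⟨by omega, by omega⟩]
          simp only [if_pos hin]
          rw [List.append_assoc]
          rfl
        · rw [if_neg (by omega)]
          simp only [if_neg hin]
      · right; omega
    · right; omega

-- the outer build fold, on embedded boards
theorem outer_emb (S : List String) : ∀ cc : List (List Char),
    S.foldl (fun tb s => (PySem.List.enumerate s.toList 0).foldl (fun tb p =>
      PySem.List.pySetD tb p.1 (PySem.List.pyGetD tb p.1 [] ++ [some p.2])) tb) (pvEmb cc)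
    = pvEmb (S.foldl (fun cc2 s => pvAppRow cc2 0 s.toList) cc) := by
  induction S with
  | nil => intro cc; rfl
  | cons s0 S ih =>
    intro cc
    have hinner := innerBuild_emb s0.toList 0 cc
    rw [Nat.cast_zero] at hinner
    rw [List.foldl_cons, List.foldl_cons, hinner, ih]

-- final sum equality
theorem sum_emb (m : Int) (cols : List (List Char)) :
    (pvEmb cols).foldl (fun s row => s + (m - PySem.List.len row)) 0 =
    cols.foldl (fun s col => s + (m - PySem.List.len col)) 0 := by
  simp [pvEmb, List.foldl_map]

theorem fuel_emb (cols : List (List Char)) :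
    (pvEmb cols).foldl (fun s row => s + row.length) 0 =
    cols.foldl (fun s col => s + col.length) 0 := by
  simp [pvEmb, List.foldl_map]

-- ======================= B-side lemmas (grid/pad correspondence) =======================

-- the settled (padded) column: holes above, content below, top-down
def padCol (M : Nat) (col : List Char) : List (Option Char) :=
  List.replicate (M - col.length) none ++ (col.reverse.map some)

-- the settled grid of a column list
def pvPadG (M : Nat) (cols : List (List Char)) : List (List (Option Char)) :=
  (List.range M).map (fun r => cols.map (fun col => (padCol M col).getD r none))

def pvInvG (M N : Nat) (cols : List (List Char)) : Prop :=
  cols.length = N ∧ ∀ col ∈ cols, col.length ≤ M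

-- cell access in the settled grid, in bottom-up coordinates
theorem padCol_getD (M : Nat) (col : List Char) (h : col.length ≤ M) (r : Nat) (hr : r < M) :
    (padCol M col).getD r none = col[M - 1 - r]? := by
  unfold padCol
  rw [List.getD_eq_getElem?_getD, List.getElem?_append]
  by_cases hrl : r < M - col.length
  · rw [if_pos (by simpa using hrl)]
    rw [List.getElem?_replicate, if_pos hrl, List.getElem?_eq_none (by omega)]
    rfl
  · rw [if_neg (by simpa using hrl)]
    simp only [List.length_replicate, List.getElem?_map]
    rw [List.getElem?_reverse (by omega)]
    have hidx : col.length - 1 - (r - (M - col.length)) = M - 1 - r := by omega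
    rw [hidx]
    rw [List.getElem?_eq_getElem (by omega)]
    simp

theorem padCol_length (M : Nat) (col : List Char) (h : col.length ≤ M) :
    (padCol M col).length = M := by
  simp [padCol]; omega

theorem foldl_add_sum_int {α : Type} (g : α → Int) (l : List α) :
    ∀ a : Int, l.foldl (fun s x => s + g x) a = a + (l.map g).sum := by
  induction l with
  | nil => intro a; simp
  | cons x l ih => intro a; simp [ih]; ring

theorem foldl_add_sum_nat {α : Type} (g : α → Nat) (l : List α) :
    ∀ a : Nat, l.foldl (fun s x => s + g x) a = a + (l.map g).sum := by
  induction l with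
  | nil => intro a; simp
  | cons x l ih => intro a; simp [ih]; omega

theorem range_map_getD (M : Nat) (l : List (Option Char)) (h : l.length = M) :
    (List.range M).map (fun r => l.getD r none) = l := by
  apply List.ext_getElem
  · simp [h]
  · intro k h1 h2
    simp only [List.getElem_map, List.getElem_range]
    rw [List.getD_eq_getElem _ _ (by omega)]

theorem count_none_padCol (M : Nat) (col : List Char) (h : col.length ≤ M) :
    (padCol M col).count none = M - col.length := by
  unfold padCol
  rw [List.count_append, List.count_replicate]
  have h0 : (col.reverse.map some).count none = 0 := by
    rw [List.count_eq_zero]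
    simp
  rw [h0]
  simp

theorem countSome_padCol (M : Nat) (col : List Char) :
    ((padCol M col).filter (fun x => x.isSome)).length = col.length := by
  unfold padCol
  rw [List.filter_append]
  have h1 : (List.replicate (M - col.length) (none : Option Char)).filter (fun x => x.isSome) = [] := by
    simp
  have h2 : (col.reverse.map some).filter (fun x => x.isSome) = col.reverse.map some := by
    rw [List.filter_eq_self]
    simp
  rw [h1, h2]
  simp

theorem sum_ind_count (l : List (Option Char)) :
    (l.map (fun x => if x == none then 1 else 0)).sum = l.count none := by
  induction l with
  | nil => simp
  | cons x xs ih =>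
    simp only [List.map_cons, List.sum_cons, ih, List.count_cons]
    cases hx : (x == none) <;> simp [hx] <;> omega

theorem sum_ind_filter (l : List (Option Char)) :
    (l.map (fun x => if x.isSome then 1 else 0)).sum = (l.filter (fun x => x.isSome)).length := by
  induction l with
  | nil => simp
  | cons x xs ih =>
    simp only [List.map_cons, List.sum_cons, ih, List.filter_cons]
    cases hx : x.isSome <;> simp [hx] <;> omega

-- transpose sum swap on the settled grid
theorem gridCount_core (M : Nat) (g : Option Char → Nat) :
    ∀ cols : List (List Char),
    (∀ col ∈ cols, col.length ≤ M) →
    ((List.range M).map (fun r => ((cols.map (fun c => (padCol M c).getD r none)).map g).sum)).sum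
    = (cols.map (fun col => ((padCol M col).map g).sum)).sum := by
  intro cols
  induction cols with
  | nil => intro _; simp
  | cons col cols ih =>
    intro h
    have hc : col.length ≤ M := h col (by simp)
    simp only [List.map_cons, List.sum_cons]
    rw [List.sum_map_add]
    congr 1
    · have : (List.range M).map (fun r => g ((padCol M col).getD r none))
          = (padCol M col).map g := by
        conv_rhs => rw [← range_map_getD M (padCol M col) (padCol_length M col hc)]
        rw [List.map_map]
        rfl
      rw [this]
    · exact ih (fun c hcm => h c (by simp [hcm]))



theorem pvPadG_row (M : Nat) (cols : List (List Char)) (r : Nat) (hr : r < M) :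
    (pvPadG M cols).getD r [] = cols.map (fun col => (padCol M col).getD r none) := by
  unfold pvPadG
  rw [List.getD_eq_getElem?_getD, List.getElem?_map, List.getElem?_range hr]
  rfl

-- pvFallen of a uniform grid is the settled grid of its extracted columns
def extractCols (N : Nat) (grid : List (List (Option Char))) : List (List Char) :=
  (List.range N).map (fun c => (grid.filterMap (fun row => row.getD c none)).reverse)

theorem filterMap_some_mask {α : Type} (g : α → Option Char) (l : List α) :
    (l.filterMap (fun row => let x := g row; if x.isSome then some x else none))
      = (l.filterMap g).map some := by
  induction l with
  | nil => rfl
  | cons a l ih =>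
    cases hx : g a
    · simp only [List.filterMap_cons, hx]
      simpa using ih
    · simp only [List.filterMap_cons, hx]
      simpa using ih

theorem pvFallen_spec (grid : List (List (Option Char))) (N : Nat)
    (hrows : ∀ row ∈ grid, row.length = N) :
    pvFallen grid = pvPadG grid.length (extractCols N grid) := by
  by_cases hne : grid = []
  · subst hne
    simp only [pvFallen, pvPadG]
    rw [PySem.List.pyRange_one_eq_nil (by norm_num)]
    simp
  · have hempty : grid.isEmpty = false := List.isEmpty_eq_false_iff.2 hne
    have hhead : (grid.headD []).length = N := by
      rcases grid with _ | ⟨r0, rest⟩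
      · exact absurd rfl hne
      · exact hrows r0 (by simp)
    simp only [pvFallen, hempty, Bool.false_eq_true, if_false]
    rw [PySem.List.foldl_append_singleton_eq_map
      (fun c => List.replicate ((PySem.List.len grid -
          PySem.List.len (grid.filterMap (fun row =>
            let x := PySem.List.pyGetD row c none
            if x.isSome then some x else none))).toNat) none ++
        grid.filterMap (fun row =>
          let x := PySem.List.pyGetD row c none
          if x.isSome then some x else none)) _ []]
    rw [List.nil_append]
    set M := grid.length with hM
    apply List.ext_getElem
    · simp only [List.length_map, PySem.List.length_pyRange_one, pvPadG, List.length_range,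
        PySem.List.len_eq]
      omega
    intro r h1 h2
    have hrM : r < M := by
      simpa only [List.length_map, PySem.List.length_pyRange_one, PySem.List.len_eq,
        Int.toNat_natCast, Int.sub_zero] using h1
    simp only [List.getElem_map, PySem.List.getElem_pyRange_one, pvPadG, List.getElem_range]
    rw [Int.zero_add]
    apply List.ext_getElem
    · simp only [List.length_map, PySem.List.length_pyRange_one, extractCols, List.length_range,
        PySem.List.len_eq, hhead]
      omega
    intro c hc1 hc2
    have hcN : c < N := by
      simpa only [List.length_map, PySem.List.length_pyRange_one, PySem.List.len_eq, hhead,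
        Int.toNat_natCast, Int.sub_zero] using hc1
    simp only [List.getElem_map, PySem.List.getElem_pyRange_one, extractCols, List.getElem_range]
    rw [Int.zero_add]
    -- the c-th settled column
    have hstack : grid.filterMap (fun row =>
        let x := PySem.List.pyGetD row ((c : Nat) : Int) none
        if x.isSome then some x else none)
        = (grid.filterMap (fun row => row.getD c none)).map some := by
      rw [← filterMap_some_mask (fun row => row.getD c none) grid]
      apply List.filterMap_congr
      intro row hrow
      rw [PySem.List.pyGetD_natCast]
    have hexlen : (grid.filterMap (fun row => row.getD c none)).length ≤ M := by
      rw [hM]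
      exact List.length_filterMap_le _ _
    have hpad : List.replicate ((PySem.List.len grid -
          PySem.List.len (grid.filterMap (fun row =>
            let x := PySem.List.pyGetD row ((c : Nat) : Int) none
            if x.isSome then some x else none))).toNat) (none : Option Char) ++
        grid.filterMap (fun row =>
          let x := PySem.List.pyGetD row ((c : Nat) : Int) none
          if x.isSome then some x else none)
        = padCol M ((grid.filterMap (fun row => row.getD c none)).reverse) := by
      rw [hstack]
      unfold padCol
      congr 1
      · congr 1
        simp only [PySem.List.len_eq, hstack, List.length_map, List.length_reverse, ← hM]
        omega
      · rw [List.reverse_reverse]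
    rw [hpad, PySem.List.pyGetD_natCast]
  

-- the hit set on a settled grid: membership
-- the settled grid's cell, in bottom-up coordinates
theorem pad_cell (M : Nat) (cols : List (List Char)) (hlens : ∀ col ∈ cols, col.length ≤ M)
    (r c : Nat) (hr : r < M) (hc : c < cols.length) :
    PySem.List.pyGetD (PySem.List.pyGetD (pvPadG M cols) ((r : Nat) : Int) [])
      ((c : Nat) : Int) none = (cols.getD c [])[M - 1 - r]? := by
  rw [PySem.List.pyGetD_natCast, PySem.List.pyGetD_natCast, pvPadG_row M cols r hr]
  have hcg : cols.getD c [] = cols[c] := List.getD_eq_getElem _ _ hc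
  rw [List.getD_eq_getElem?_getD, List.getElem?_map, List.getElem?_eq_getElem hc]
  simp only [Option.map_some, Option.getD_some]
  rw [padCol_getD M _ (hlens _ (List.getElem_mem hc)) r hr, hcg]

-- the hit test at a grid position is pvSq at the corresponding bottom-up height
theorem hit_cond_iff (cols : List (List Char)) (c i : Nat) :
    (((cols.getD c [])[i + 1]?).isSome &&
     ((cols.getD c [])[i + 1]? == (cols.getD (c + 1) [])[i + 1]?) &&
     ((cols.getD (c + 1) [])[i + 1]? == (cols.getD c [])[i]?) &&
     ((cols.getD c [])[i]? == (cols.getD (c + 1) [])[i]?)) = pvSq cols c i := by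
  unfold pvSq
  by_cases h1 : i + 1 < (cols.getD c []).length
  · by_cases h2 : i + 1 < (cols.getD (c + 1) []).length
    · obtain ⟨a2, ha2⟩ : ∃ v, (cols.getD c [])[i + 1]? = some v :=
        ⟨_, List.getElem?_eq_getElem h1⟩
      obtain ⟨a1, ha1⟩ : ∃ v, (cols.getD c [])[i]? = some v :=
        ⟨_, List.getElem?_eq_getElem (by omega)⟩
      obtain ⟨b2, hb2⟩ : ∃ v, (cols.getD (c + 1) [])[i + 1]? = some v :=
        ⟨_, List.getElem?_eq_getElem h2⟩
      obtain ⟨b1, hb1⟩ : ∃ v, (cols.getD (c + 1) [])[i]? = some v :=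
        ⟨_, List.getElem?_eq_getElem (by omega)⟩
      rw [ha1, ha2, hb1, hb2]
      simp only [List.getD_eq_getElem?_getD] at h1 h2
      simp only [h1, h2, decide_true, Option.isSome_some, Bool.true_and]
      rw [Bool.eq_iff_iff]
      simp only [Bool.and_eq_true, beq_iff_eq, Option.some.injEq]
      constructor
      · rintro ⟨⟨u1, u2⟩, u3⟩
        refine ⟨⟨?_, ?_⟩, ?_⟩ <;> simp_all
      · rintro ⟨⟨u1, u2⟩, u3⟩
        refine ⟨⟨?_, ?_⟩, ?_⟩ <;> simp_all
    · have hb2 : (cols.getD (c + 1) [])[i + 1]? = none := List.getElem?_eq_none (by omega)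
      obtain ⟨a2, ha2⟩ : ∃ v, (cols.getD c [])[i + 1]? = some v :=
        ⟨_, List.getElem?_eq_getElem h1⟩
      rw [ha2, hb2]
      simp only [List.getD_eq_getElem?_getD] at h2
      simp [h2]
  · have ha2 : (cols.getD c [])[i + 1]? = none := List.getElem?_eq_none (by omega)
    rw [ha2]
    simp only [List.getD_eq_getElem?_getD] at h1
    simp [h1]

theorem mem_pvHit (m n : Int) (M : Nat) (hm : (m : Int) = (M : Int)) (cols : List (List Char))
    (hinv : pvInvG M n.toNat cols) (x : Int × Int) :
    x ∈ pvHit m n (pvPadG M cols) ↔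
      ∃ r c : Nat, x = ((r : Int), (c : Int)) ∧ r + 1 < M ∧ c + 1 < cols.length ∧
        pvSq cols c (M - 2 - r) = true := by
  obtain ⟨hN, hlens⟩ := hinv
  unfold pvHit
  rw [PySem.Set.mem_ofList, List.mem_flatMap]
  constructor
  · rintro ⟨r, hr, hx⟩
    rw [List.mem_filterMap] at hx
    obtain ⟨c, hc, hfc⟩ := hx
    rw [PySem.List.mem_pyRange_one] at hr hc
    split_ifs at hfc with hcond
    have hrn : r = ((r.toNat : Nat) : Int) := by omega
    have hcn : c = ((c.toNat : Nat) : Int) := by omega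
    have hrM : r.toNat + 1 < M := by omega
    have hcN : c.toNat + 1 < cols.length := by rw [hN]; omega
    refine ⟨r.toNat, c.toNat, by simp only [Option.some.injEq] at hfc; rw [← hfc]; exact Prod.ext (by omega) (by omega), hrM, hcN, ?_⟩
    rw [hrn, hcn] at hcond
    rw [show ((r.toNat : Nat) : Int) + 1 = ((r.toNat + 1 : Nat) : Int) from by push_cast; ring,
        show ((c.toNat : Nat) : Int) + 1 = ((c.toNat + 1 : Nat) : Int) from by push_cast; ring] at hcond
    rw [pad_cell M cols hlens _ _ (by omega) (by omega),
        pad_cell M cols hlens _ _ (by omega) (by omega),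
        pad_cell M cols hlens _ _ (by omega) (by omega),
        pad_cell M cols hlens _ _ (by omega) (by omega)] at hcond
    rw [show M - 1 - r.toNat = (M - 2 - r.toNat) + 1 from by omega,
        show M - 1 - (r.toNat + 1) = M - 2 - r.toNat from by omega] at hcond
    rw [hit_cond_iff cols c.toNat (M - 2 - r.toNat)] at hcond
    exact hcond
  · rintro ⟨r, c, rfl, hrM, hcN, hsq⟩
    refine ⟨(r : Int), ?_, ?_⟩
    · rw [PySem.List.mem_pyRange_one]; omega
    · rw [List.mem_filterMap]
      refine ⟨(c : Int), ?_, ?_⟩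
      · rw [PySem.List.mem_pyRange_one]
        constructor
        · omega
        · have : c + 1 < n.toNat := by omega
          omega
      · rw [show ((r : Nat) : Int) + 1 = ((r + 1 : Nat) : Int) from by push_cast; ring,
            show ((c : Nat) : Int) + 1 = ((c + 1 : Nat) : Int) from by push_cast; ring]
        rw [pad_cell M cols hlens _ _ (by omega) (by omega),
            pad_cell M cols hlens _ _ (by omega) (by omega),
            pad_cell M cols hlens _ _ (by omega) (by omega),
            pad_cell M cols hlens _ _ (by omega) (by omega)]
        rw [show M - 1 - r = (M - 2 - r) + 1 from by omega,
            show M - 1 - (r + 1) = M - 2 - r from by omega]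
        rw [if_pos (by rw [hit_cond_iff cols c (M - 2 - r)]; exact hsq)]

theorem pvHit_empty_iff (m n : Int) (M : Nat) (hm : (m : Int) = (M : Int))
    (cols : List (List Char)) (hinv : pvInvG M n.toNat cols) :
    (pvHit m n (pvPadG M cols)).isEmpty = (pvMarked cols).isEmpty := by
  rw [Bool.eq_iff_iff, List.isEmpty_iff, List.isEmpty_iff,
    List.eq_nil_iff_forall_not_mem, List.eq_nil_iff_forall_not_mem]
  constructor
  · intro h x hx
    rw [mem_pvMarked] at hx
    obtain ⟨r, i, hsq, hr, -⟩ := hx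
    have hil : i + 1 < (cols.getD r []).length := by
      unfold pvSq at hsq
      simp at hsq
      rw [List.getD_eq_getElem?_getD]
      omega
    have hrc : r < cols.length := by omega
    have hcolmem : cols.getD r [] ∈ cols := by
      rw [List.getD_eq_getElem _ _ hrc]; exact List.getElem_mem hrc
    have hlM : (cols.getD r []).length ≤ M := hinv.2 _ hcolmem
    exact h (((M - 2 - i : Nat) : Int), (r : Int)) ((mem_pvHit m n M hm cols hinv _).2
      ⟨M - 2 - i, r, rfl, by omega, by omega,
        by rw [show M - 2 - (M - 2 - i) = i from by omega]; exact hsq⟩)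
  · intro h x hx
    rw [mem_pvHit m n M hm cols hinv] at hx
    obtain ⟨r, c, rfl, hr, hc, hsq⟩ := hx
    exact h (((c : Nat) : Int), ((M - 2 - r : Nat) : Int))
      ((mem_pvMarked cols _).2 ⟨c, M - 2 - r, hsq, hc, Or.inl rfl⟩)

-- a cell is blanked iff one of the four squares covering it was hit
def covB (hit : PySem.Set (Int × Int)) (r c : Nat) : Bool :=
  PySem.Set.contains hit ((r : Int), (c : Int)) ||
  PySem.Set.contains hit ((r : Int) - 1, (c : Int)) ||
  PySem.Set.contains hit ((r : Int), (c : Int) - 1) ||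
  PySem.Set.contains hit ((r : Int) - 1, (c : Int) - 1)

theorem pvBlank_pad (hit : PySem.Set (Int × Int)) (M : Nat) (cols : List (List Char)) :
    pvBlank hit (pvPadG M cols) = (List.range M).map (fun r => (List.range cols.length).map
      (fun c => if covB hit r c then none else (padCol M (cols.getD c [])).getD r none)) := by
  unfold pvBlank
  apply List.ext_getElem
  · simp [pvPadG, PySem.List.length_enumerate]
  intro r h1 h2
  simp only [List.getElem_map, PySem.List.getElem_enumerate, List.getElem_range]
  apply List.ext_getElem
  · simp [pvPadG, PySem.List.length_enumerate]
  intro c hc1 hc2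
  have hcN : c < cols.length := by simpa using hc2
  simp only [pvPadG, List.getElem_map, List.getElem_range, PySem.List.getElem_enumerate]
  simp only [Int.zero_add, covB]
  rw [List.getD_eq_getElem _ _ hcN]
  rfl

-- reindexing a range filterMap through reversal
theorem range_rev_filterMap {α : Type} (M : Nat) (f : Nat → Option α) :
    ((List.range M).filterMap f).reverse = (List.range M).filterMap (fun j => f (M - 1 - j)) := by
  rw [← List.filterMap_reverse]
  have hrev : (List.range M).reverse = (List.range M).map (fun j => M - 1 - j) := by
    apply List.ext_getElem
    · simp
    intro k h1 h2
    rw [List.getElem_reverse, List.getElem_range, List.getElem_map, List.getElem_range]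
    simp
  rw [hrev, List.filterMap_map]
  rfl

-- unused upper indices of a range filterMap may be dropped
theorem filterMap_range_restrict {α : Type} (L K : Nat) (hK : K ≤ L) (f : Nat → Option α)
    (hf : ∀ j, K ≤ j → j < L → f j = none) :
    (List.range L).filterMap f = (List.range K).filterMap f := by
  rw [show L = K + (L - K) from by omega, List.range_add, List.filterMap_append]
  have h2 : (List.filterMap f ((List.range (L - K)).map (fun x => K + x))) = [] := by
    rw [List.filterMap_map, List.filterMap_eq_nil_iff]
    intro a ha
    rw [List.mem_range] at ha
    exact hf (K + a) (by omega) (by omega)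
  rw [h2, List.append_nil]

-- the enumerate/filter column form as an index filterMap
theorem filt_enum (P : Int → Bool) : ∀ (l : List Char) (s : Nat),
    ((PySem.List.enumerate l ((s : Nat) : Int)).filter (fun q => !P q.1)).map (fun q => q.2)
    = (List.range l.length).filterMap (fun j => if P (((s + j : Nat) : Int)) then none else l[j]?) := by
  intro l
  induction l with
  | nil => intro s; rfl
  | cons x xs ih =>
    intro s
    rw [PySem.List.enumerate_cons, List.length_cons, List.range_succ_eq_map,
      List.filterMap_cons, List.filter_cons]
    have hc : ((s + 0 : Nat) : Int) = ((s : Nat) : Int) := by push_cast; ring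
    have hmap : (List.filterMap
          (fun j => if P (((s + j : Nat) : Int)) then none else (x :: xs)[j]?)
          ((List.range xs.length).map Nat.succ))
        = (List.range xs.length).filterMap
            (fun j => if P ((((s + 1) + j : Nat) : Int)) then none else xs[j]?) := by
      rw [List.filterMap_map]
      apply List.filterMap_congr
      intro j _
      simp only [Function.comp, Nat.succ_eq_add_one]
      rw [show s + (j + 1) = (s + 1) + j from by omega]
      rfl
    have hrec := ih (s + 1)
    rw [show (((s + 1 : Nat) : Nat) : Int) = ((s : Nat) : Int) + 1 from by push_cast; ring] at hrec
    rw [hc]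
    by_cases hP : P ((s : Nat) : Int)
    · simp only [hP, Bool.not_true, Bool.false_eq_true, if_false, if_true]
      rw [hmap, ← hrec]
    · simp only [hP, Bool.not_false, if_true, Bool.false_eq_true, if_false, List.map_cons]
      rw [hmap, ← hrec]
      rfl

-- blanked-covered = marked, in bottom-up coordinates
theorem covB_iff_marked (m n : Int) (M : Nat) (hm : (m : Int) = (M : Int))
    (cols : List (List Char)) (hinv : pvInvG M n.toNat cols) (c j : Nat)
    (hc : c < cols.length) (hj : j < (cols.getD c []).length) :
    covB (pvHit m n (pvPadG M cols)) (M - 1 - j) c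
      = PySem.Set.contains (pvMarked cols) ((c : Int), (j : Int)) := by
  have hjM : j < M := by
    have : (cols.getD c []).length ≤ M := by
      apply hinv.2
      rw [List.getD_eq_getElem _ _ hc]
      exact List.getElem_mem hc
    omega
  rw [Bool.eq_iff_iff]
  unfold covB
  simp only [Bool.or_eq_true, PySem.Set.contains_iff]
  rw [mem_pvMarked_iff_cov]
  constructor
  · intro hOr
    rcases hOr with ((hA | hA) | hA) | hA <;>
    · obtain ⟨ra, ca, hx, hra, hca, hsq⟩ := (mem_pvHit m n M hm cols hinv _).mp hA
      rw [Prod.ext_iff] at hx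
      simp only at hx
      refine ⟨ca, M - 2 - ra, hsq, hca, by omega, by omega⟩
  · rintro ⟨r'', i'', hsq, hr'', hor1, hor2⟩
    have hil : i'' + 1 < (cols.getD r'' []).length := by
      unfold pvSq at hsq
      simp at hsq
      rw [List.getD_eq_getElem?_getD]
      omega
    have hlM : (cols.getD r'' []).length ≤ M := by
      apply hinv.2
      rw [List.getD_eq_getElem _ _ (by omega : r'' < cols.length)]
      exact List.getElem_mem _
    have hgr : M - 2 - (M - 2 - i'') = i'' := by omega
    have hhit : ∀ a b : Int, a = ((M - 2 - i'' : Nat) : Int) → b = ((r'' : Nat) : Int) →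
        (a, b) ∈ pvHit m n (pvPadG M cols) := by
      intro a b ha hb
      rw [ha, hb, mem_pvHit m n M hm cols hinv]
      exact ⟨M - 2 - i'', r'', rfl, by omega, by omega, by rw [hgr]; exact hsq⟩
    rcases hor1 with h1 | h1 <;> rcases hor2 with h2 | h2
    · exact Or.inl (Or.inl (Or.inr (hhit _ _ (by omega) (by omega))))
    · exact Or.inl (Or.inl (Or.inl (hhit _ _ (by omega) (by omega))))
    · exact Or.inr (hhit _ _ (by omega) (by omega))
    · exact Or.inl (Or.inr (hhit _ _ (by omega) (by omega)))

-- the model step, written out (identity when nothing is marked)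
theorem stepRes_eq (cols : List (List Char)) :
    pvStepRes cols = (PySem.List.enumerate cols 0).map (fun p =>
      ((PySem.List.enumerate p.2 0).filter
        (fun q => !(PySem.Set.contains (pvMarked cols) (p.1, q.1)))).map (fun q => q.2)) := by
  unfold pvStepRes pvStep
  by_cases h : (pvMarked cols).isEmpty
  · rw [if_pos h]
    simp only [Option.getD_none]
    have hemp : pvMarked cols = [] := by rwa [List.isEmpty_iff] at h
    apply List.ext_getElem
    · simp [PySem.List.length_enumerate]
    intro k h1 h2
    rw [List.getElem_map, PySem.List.getElem_enumerate]
    have hall : ∀ q ∈ PySem.List.enumerate (cols[k]) 0,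
        (!(PySem.Set.contains (pvMarked cols) (((0 : Int) + (k : Nat), cols[k]).1, q.1))) = true := by
      intro q hq
      rw [hemp]
      rfl
    rw [List.filter_eq_self.2 hall, PySem.List.map_snd_enumerate]
  · rw [if_neg h]
    rfl

-- one grid round = one model round
theorem grid_round (m n : Int) (M : Nat) (hm : (m : Int) = (M : Int))
    (cols : List (List Char)) (hinv : pvInvG M n.toNat cols) :
    pvFallen (pvBlank (pvHit m n (pvPadG M cols)) (pvPadG M cols)) = pvPadG M (pvStepRes cols) := by
  set hit := pvHit m n (pvPadG M cols) with hhit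
  rw [pvBlank_pad]
  have hrows : ∀ row ∈ (List.range M).map (fun r => (List.range cols.length).map
      (fun c => if covB hit r c then none else (padCol M (cols.getD c [])).getD r none)),
      row.length = cols.length := by
    intro row hrow
    rw [List.mem_map] at hrow
    obtain ⟨r, -, rfl⟩ := hrow
    simp
  rw [pvFallen_spec _ cols.length hrows]
  rw [show ((List.range M).map (fun r => (List.range cols.length).map
      (fun c => if covB hit r c then none else (padCol M (cols.getD c [])).getD r none))).length = M
    from by simp]
  congr 1
  rw [stepRes_eq]
  apply List.ext_getElem
  · simp [extractCols, PySem.List.length_enumerate]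
  intro c hc1 hc2
  have hcN : c < cols.length := by
    simpa [extractCols] using hc1
  unfold extractCols
  rw [List.getElem_map, List.getElem_range, List.getElem_map, PySem.List.getElem_enumerate]
  simp only [Int.zero_add]
  -- reduce the blanked grid's c-th extracted column
  rw [List.filterMap_map]
  have hcol : ∀ r ∈ List.range M,
      ((fun row : List (Option Char) => row.getD c none) ∘ (fun r => (List.range cols.length).map
        (fun c => if covB hit r c then none else (padCol M (cols.getD c [])).getD r none))) r
      = if covB hit r c then none else (cols.getD c [])[M - 1 - r]? := by
    intro r hr
    rw [List.mem_range] at hr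
    simp only [Function.comp]
    rw [List.getD_eq_getElem _ _ (by simpa using hcN), List.getElem_map, List.getElem_range]
    have hlen : (cols.getD c []).length ≤ M := by
      apply hinv.2
      rw [List.getD_eq_getElem _ _ hcN]
      exact List.getElem_mem hcN
    rw [padCol_getD M _ hlen r hr]
  rw [List.filterMap_congr hcol, range_rev_filterMap]
  have hlen : (cols.getD c []).length ≤ M := by
    apply hinv.2
    rw [List.getD_eq_getElem _ _ hcN]
    exact List.getElem_mem hcN
  have hre : ∀ j ∈ List.range M,
      (if covB hit (M - 1 - j) c then none else (cols.getD c [])[M - 1 - (M - 1 - j)]?)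
      = (if covB hit (M - 1 - j) c then none else (cols.getD c [])[j]?) := by
    intro j hj
    rw [List.mem_range] at hj
    rw [show M - 1 - (M - 1 - j) = j from by omega]
  rw [List.filterMap_congr hre]
  rw [filterMap_range_restrict M (cols.getD c []).length hlen _ (by
    intro j hK hL
    rw [List.getElem?_eq_none (by omega)]
    split_ifs <;> rfl)]
  have hfin : ∀ j ∈ List.range (cols.getD c []).length,
      (if covB hit (M - 1 - j) c then none else (cols.getD c [])[j]?)
      = (if PySem.Set.contains (pvMarked cols) ((c : Int), ((0 + j : Nat) : Int)) = true then none
          else (cols.getD c [])[j]?) := by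
    intro j hj
    rw [List.mem_range] at hj
    rw [hhit, covB_iff_marked m n M hm cols hinv c j hcN hj]
    try rw [show ((0 + j : Nat) : Int) = ((j : Nat) : Int) from by push_cast; ring]
  rw [List.filterMap_congr hfin]
  rw [show cols[c] = cols.getD c [] from (List.getD_eq_getElem _ _ hcN).symm]
  rw [show (0 : Int) = ((0 : Nat) : Int) from rfl, filt_enum
    (fun t => PySem.Set.contains (pvMarked cols) ((c : Int), t)) (cols.getD c []) 0]

-- the model step preserves the invariant
theorem pvStepRes_inv (M N : Nat) (cols : List (List Char)) (hinv : pvInvG M N cols) :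
    pvInvG M N (pvStepRes cols) := by
  unfold pvStepRes pvStep
  by_cases h : (pvMarked cols).isEmpty
  · rw [if_pos h]
    exact hinv
  · rw [if_neg h]
    simp only [Option.getD_some]
    constructor
    · rw [List.length_map, PySem.List.length_enumerate]
      exact hinv.1
    · intro col hcol
      rw [List.mem_map] at hcol
      obtain ⟨p, hp, rfl⟩ := hcol
      rw [PySem.List.mem_enumerate_iff] at hp
      obtain ⟨kk, hk, rfl⟩ := hp
      calc ((((PySem.List.enumerate (cols[kk]) 0).filter _).map (fun q => q.2))).length
          ≤ (PySem.List.enumerate (cols[kk]) 0).length := by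
            rw [List.length_map]; exact List.length_filter_le _ _
        _ = (cols[kk]).length := PySem.List.length_enumerate _ _
        _ ≤ M := hinv.2 _ (List.getElem_mem hk)

-- total content strictly decreases on a real step
def sumLen (cols : List (List Char)) : Nat := cols.foldl (fun s col => s + col.length) 0

theorem pvStep_decrease (cols c2 : List (List Char)) (h : pvStep cols = some c2) :
    sumLen c2 < sumLen cols := by
  unfold pvStep at h
  by_cases hmk : (pvMarked cols).isEmpty
  · rw [if_pos hmk] at h; exact absurd h (by simp)
  rw [if_neg hmk] at h
  simp only [Option.some.injEq] at h
  subst h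
  have hex : ∃ x, x ∈ pvMarked cols := by
    rcases List.isEmpty_eq_false_iff_exists_mem.1 (by simpa using hmk) with ⟨x, hx⟩
    exact ⟨x, hx⟩
  obtain ⟨x, hx⟩ := hex
  rw [mem_pvMarked] at hx
  obtain ⟨r, i, hsq, hr, -⟩ := hx
  have hri : ((r : Int), (i : Int)) ∈ pvMarked cols :=
    (mem_pvMarked _ _).2 ⟨r, i, hsq, hr, Or.inl rfl⟩
  have hilen : i + 1 < (cols.getD r []).length := by
    unfold pvSq at hsq
    simp only [List.getD_eq_getElem?_getD] at hsq ⊢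
    simp at hsq
    omega
  have hrlen : r < cols.length := by omega
  have hgetD : cols.getD r [] = cols[r] := List.getD_eq_getElem _ _ hrlen
  unfold sumLen
  rw [foldl_add_sum_nat, foldl_add_sum_nat]
  simp only [Nat.zero_add]
  conv_rhs => rw [show cols = (PySem.List.enumerate cols 0).map (fun p => p.2)
    from (PySem.List.map_snd_enumerate _ _).symm]
  rw [List.map_map, List.map_map]
  apply List.sum_lt_sum
  · intro p _
    simp only [Function.comp]
    calc (((PySem.List.enumerate p.2 0).filter
          (fun q => !(PySem.Set.contains (pvMarked cols) (p.1, q.1)))).map (fun q => q.2)).length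
        ≤ (PySem.List.enumerate p.2 0).length := by
          rw [List.length_map]; exact List.length_filter_le _ _
      _ = p.2.length := PySem.List.length_enumerate _ _
  · refine ⟨((r : Int), cols[r]), ?_, ?_⟩
    · rw [PySem.List.mem_enumerate_iff]
      exact ⟨r, hrlen, by simp⟩
    · simp only [Function.comp]
      rw [List.length_map]
      have h1 : ((PySem.List.enumerate (cols[r]) 0).filter
          (fun q => !(PySem.Set.contains (pvMarked cols) ((((r : Int), cols[r]) : Int × List Char).1, q.1)))).length
          < (PySem.List.enumerate (cols[r]) 0).length := by
        rw [List.length_filter_lt_length_iff_exists]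
        have hi' : i < (cols[r]).length := by rw [← hgetD]; omega
        refine ⟨((i : Int), (cols[r])[i]'hi'), ?_, ?_⟩
        · rw [PySem.List.mem_enumerate_iff]
          exact ⟨i, hi', by simp⟩
        · simpa using hri
      calc ((PySem.List.enumerate (cols[r]) 0).filter
            (fun q => !(PySem.Set.contains (pvMarked cols) ((((r : Int), cols[r]) : Int × List Char).1, q.1)))).length
          < (PySem.List.enumerate (cols[r]) 0).length := h1
        _ = (cols[r]).length := PySem.List.length_enumerate _ _

-- the padded grid's filled-cell count is the model's total content
theorem someCount_pad (M : Nat) (cols : List (List Char)) (hinv : ∀ col ∈ cols, col.length ≤ M) :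
    (pvPadG M cols).foldl (fun s row => s + (row.filter (fun x => x.isSome)).length) 0 = sumLen cols := by
  unfold sumLen
  rw [foldl_add_sum_nat, foldl_add_sum_nat]
  simp only [Nat.zero_add]
  unfold pvPadG
  rw [List.map_map]
  have h1 : ∀ r ∈ List.range M,
      ((fun row : List (Option Char) => (row.filter (fun x => x.isSome)).length) ∘
        fun r => cols.map (fun col => (padCol M col).getD r none)) r
      = ((cols.map (fun c => (padCol M c).getD r none)).map (fun x => if x.isSome then 1 else 0)).sum := by
    intro r _
    simp only [Function.comp]
    rw [sum_ind_filter]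
  rw [List.map_congr_left h1, gridCount_core M _ cols hinv]
  apply congrArg
  apply List.map_congr_left
  intro col hcol
  rw [sum_ind_filter, countSome_padCol]


-- the padded grid's hole count is the model's final sum
theorem noneCount_pad (m : Int) (M : Nat) (hm : (m : Int) = (M : Int)) (cols : List (List Char))
    (hinv : ∀ col ∈ cols, col.length ≤ M) :
    (pvPadG M cols).foldl (fun s row => s + (PySem.List.count row none : Int)) 0 =
      cols.foldl (fun s col => s + (m - PySem.List.len col)) 0 := by
  rw [foldl_add_sum_int, foldl_add_sum_int]
  simp only [zero_add]
  have hR : cols.map (fun col => m - PySem.List.len col)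
      = cols.map (fun col => (((M - col.length : Nat) : Int))) := by
    apply List.map_congr_left
    intro col hcol
    have := hinv col hcol
    simp only [PySem.List.len_eq]
    omega
  rw [hR]
  have hL : (pvPadG M cols).map (fun row => (PySem.List.count row none : Int))
      = ((pvPadG M cols).map (fun row => row.count none)).map (fun k : Nat => (k : Int)) := by
    rw [List.map_map]
    apply List.map_congr_left
    intro row _
    simp [PySem.List.count_eq]
  rw [hL]
  rw [show cols.map (fun col => ((M - col.length : Nat) : Int))
      = (cols.map (fun col => (M - col.length : Nat))).map (fun k : Nat => (k : Int)) by
    rw [List.map_map]; rfl]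
  rw [← Nat.cast_list_sum, ← Nat.cast_list_sum]
  congr 1
  unfold pvPadG
  rw [List.map_map]
  have h1 : ∀ r ∈ List.range M,
      ((fun row : List (Option Char) => row.count none) ∘
        fun r => cols.map (fun col => (padCol M col).getD r none)) r
      = ((cols.map (fun c => (padCol M c).getD r none)).map (fun x => if x == none then 1 else 0)).sum := by
    intro r _
    simp only [Function.comp]
    rw [sum_ind_count]
  rw [List.map_congr_left h1, gridCount_core M _ cols hinv]
  apply congrArg
  apply List.map_congr_left
  intro col hcol
  rw [sum_ind_count, count_none_padCol M col (hinv col hcol)]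

-- the grid loop computes the model loop's final sum
theorem loopG_model (m n : Int) (M : Nat) (hm : (m : Int) = (M : Int)) :
    ∀ (f : Nat) (cols : List (List Char)), pvInvG M n.toNat cols → sumLen cols < f →
    pvLoopG m n f (pvPadG M cols) =
      (pvLoopB f cols).foldl (fun s col => s + (m - PySem.List.len col)) 0 := by
  intro f
  induction f with
  | zero =>
    intro cols hinv hf
    exact absurd hf (by omega)
  | succ f ih =>
    intro cols hinv hf
    simp only [pvLoopG]
    rw [pvHit_empty_iff m n M hm cols hinv]
    by_cases hmk : (pvMarked cols).isEmpty
    · rw [if_pos hmk]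
      have hstep : pvStep cols = none := by
        unfold pvStep
        rw [if_pos hmk]
      conv_rhs => rw [pvLoopB, hstep]
      exact noneCount_pad m M hm cols hinv.2
    · rw [if_neg hmk]
      obtain ⟨c2, hc2⟩ : ∃ c2, pvStep cols = some c2 := by
        unfold pvStep
        rw [if_neg hmk]
        exact ⟨_, rfl⟩
      have hres : pvStepRes cols = c2 := by
        unfold pvStepRes
        rw [hc2]
        rfl
      rw [grid_round m n M hm cols hinv, hres]
      conv_rhs => rw [pvLoopB, hc2]
      have hinv2 : pvInvG M n.toNat c2 := by
        rw [← hres]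
        exact pvStepRes_inv M n.toNat cols hinv
      have hdec : sumLen c2 < f := by
        have := pvStep_decrease cols c2 hc2
        omega
      exact ih c2 hinv2 hdec

-- the first m board rows, as read by the ports
theorem rows_take (m : Int) (board : List String) (hm : 0 ≤ m) (hmb : m.toNat ≤ board.length) :
    (PySem.List.pyRange 0 m 1).map (fun r => PySem.List.pyGetD board r "") = board.take m.toNat := by
  apply List.ext_getElem
  · simp [PySem.List.length_pyRange_one]
    omega
  intro k h1 h2
  have hk : k < m.toNat := by
    simpa [PySem.List.length_pyRange_one] using h1
  have hkb : k < board.length := by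
    have := List.length_take (i := m.toNat) (l := board)
    omega
  rw [List.getElem_map, PySem.List.getElem_pyRange_one, Int.zero_add, List.getElem_take,
    PySem.List.pyGetD_natCast, List.getD_eq_getElem _ _ hkb]

theorem getD_replicate_nil (k c : Nat) :
    (List.replicate k ([] : List Char)).getD c [] = [] := by
  simp only [List.getD_eq_getElem?_getD, List.getElem?_replicate]
  split_ifs <;> rfl

-- B's initial grid is the settled grid of A's built columns
theorem grid0_eq (m n : Int) (board : List String) (hm : 0 ≤ m)
    (hPre : Pre_solution m n board) :
    pvFallen ((PySem.List.pyRange 0 m 1).map (fun r =>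
      (PySem.List.pyRange 0 n 1).map (fun c =>
        if c < PySem.Str.len (PySem.List.pyGetD board r "") then
          some (PySem.List.pyGetD (PySem.List.pyGetD board r "").toList c ' ') else none)))
    = pvPadG m.toNat (((board.take m.toNat).reverse).foldl (fun cc2 s => pvAppRow cc2 0 s.toList)
        (List.replicate n.toNat [])) := by
  obtain ⟨hmb', hrows⟩ := hPre
  have hmb : m.toNat ≤ board.length := by
    simp only [PySem.List.len_eq] at hmb'
    omega
  have hS : ∀ s ∈ (board.take m.toNat).reverse,
      s.toList.length ≤ (List.replicate n.toNat ([] : List Char)).length := by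
    intro s hs
    rw [List.mem_reverse] at hs
    have hsl := hrows s hs
    rw [PySem.Str.len_eq] at hsl
    simp only [List.length_replicate]
    omega
  have hOB := outerBuild ((board.take m.toNat).reverse) (List.replicate n.toNat []) hS
  have hgridrows : ∀ row ∈ (PySem.List.pyRange 0 m 1).map (fun r =>
      (PySem.List.pyRange 0 n 1).map (fun c =>
        if c < PySem.Str.len (PySem.List.pyGetD board r "") then
          some (PySem.List.pyGetD (PySem.List.pyGetD board r "").toList c ' ') else none)),
      row.length = n.toNat := by
    intro row hrow
    rw [List.mem_map] at hrow
    obtain ⟨r, -, rfl⟩ := hrow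
    simp [PySem.List.length_pyRange_one]
  rw [pvFallen_spec _ n.toNat hgridrows]
  rw [show ((PySem.List.pyRange 0 m 1).map (fun r =>
      (PySem.List.pyRange 0 n 1).map (fun c =>
        if c < PySem.Str.len (PySem.List.pyGetD board r "") then
          some (PySem.List.pyGetD (PySem.List.pyGetD board r "").toList c ' ') else none))).length
      = m.toNat from by simp [PySem.List.length_pyRange_one]]
  congr 1
  apply List.ext_getElem
  · rw [show (extractCols n.toNat ((PySem.List.pyRange 0 m 1).map (fun r =>
        (PySem.List.pyRange 0 n 1).map (fun c =>
          if c < PySem.Str.len (PySem.List.pyGetD board r "") then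
            some (PySem.List.pyGetD (PySem.List.pyGetD board r "").toList c ' ') else none)))).length
        = n.toNat from by simp [extractCols]]
    rw [(hOB 0).2]
    simp
  intro c hc1 hc2
  have hcN : c < n.toNat := by
    simpa [extractCols] using hc1
  -- reduce the left column
  unfold extractCols
  rw [List.getElem_map, List.getElem_range, List.filterMap_map]
  have hcolfun : ∀ r ∈ PySem.List.pyRange 0 m 1,
      ((fun row : List (Option Char) => row.getD c none) ∘ (fun r =>
        (PySem.List.pyRange 0 n 1).map (fun c =>
          if c < PySem.Str.len (PySem.List.pyGetD board r "") then
            some (PySem.List.pyGetD (PySem.List.pyGetD board r "").toList c ' ') else none))) r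
      = (fun s : String => if c < s.toList.length then some (s.toList.getD c ' ') else none)
          (PySem.List.pyGetD board r "") := by
    intro r _
    simp only [Function.comp]
    rw [List.getD_eq_getElem _ _ (by simp [PySem.List.length_pyRange_one]; omega),
      List.getElem_map, PySem.List.getElem_pyRange_one, Int.zero_add]
    rw [PySem.Str.len_eq, PySem.List.pyGetD_natCast]
    simp only [Nat.cast_lt]
  rw [List.filterMap_congr hcolfun]
  rw [show (fun r => (fun s : String =>
        if c < s.toList.length then some (s.toList.getD c ' ') else none)
        (PySem.List.pyGetD board r ""))
      = ((fun s : String => if c < s.toList.length then some (s.toList.getD c ' ') else none) ∘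
          (fun r => PySem.List.pyGetD board r "")) from rfl]
  rw [← List.filterMap_map, rows_take m board hm hmb, ← List.filterMap_reverse]
  rw [← List.getD_eq_getElem _ [] hc2]
  rcases (hOB c).1 with hchar | hlen2
  · rw [hchar, getD_replicate_nil, List.nil_append]
  · exfalso
    simp only [List.length_replicate] at hlen2
    omega

-- A's built columns satisfy the invariant
theorem buildCols_inv (m n : Int) (board : List String) (hm : 0 ≤ m) (hPre : Pre_solution m n board) :
    pvInvG m.toNat n.toNat (((board.take m.toNat).reverse).foldl (fun cc2 s => pvAppRow cc2 0 s.toList)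
      (List.replicate n.toNat [])) := by
  obtain ⟨hmb', hrows⟩ := hPre
  have hS : ∀ s ∈ (board.take m.toNat).reverse,
      s.toList.length ≤ (List.replicate n.toNat ([] : List Char)).length := by
    intro s hs
    rw [List.mem_reverse] at hs
    have hsl := hrows s hs
    rw [PySem.Str.len_eq] at hsl
    simp only [List.length_replicate]
    omega
  have hOB := outerBuild ((board.take m.toNat).reverse) (List.replicate n.toNat []) hS
  constructor
  · rw [(hOB 0).2]
    simp
  · intro col hcol
    rw [List.mem_iff_getElem] at hcol
    obtain ⟨k, hk, hEq⟩ := hcol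
    have hkN : k < n.toNat := by
      rw [(hOB 0).2] at hk
      simpa using hk
    rw [← hEq, ← List.getD_eq_getElem _ [] hk]
    rcases (hOB k).1 with hchar | hlen2
    · rw [hchar, getD_replicate_nil, List.nil_append]
      calc (((board.take m.toNat).reverse).filterMap (fun s =>
            if k < s.toList.length then some (s.toList.getD k ' ') else none)).length
          ≤ ((board.take m.toNat).reverse).length := List.length_filterMap_le _ _
        _ ≤ m.toNat := by
            simp only [List.length_reverse, List.length_take]
            omega
    · exfalso
      simp only [List.length_replicate] at hlen2
      omega

-- A's build fold runs over the reversed first-m rows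
theorem buildFold_eq (m n : Int) (board : List String) (hm : 0 ≤ m) (hmb : m ≤ PySem.List.len board) :
    (PySem.List.pyRange (m - 1) (-1) (-1)).foldl (fun tb r =>
      (PySem.List.enumerate (PySem.List.pyGetD board r "").toList 0).foldl (fun tb p =>
        PySem.List.pySetD tb p.1 (PySem.List.pyGetD tb p.1 [] ++ [some p.2])) tb)
      (pvEmb (List.replicate n.toNat []))
    = pvEmb (((board.take m.toNat).reverse).foldl (fun cc2 s => pvAppRow cc2 0 s.toList)
        (List.replicate n.toNat [])) := by
  have hmb2 : m.toNat ≤ board.length := by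
    simp only [PySem.List.len_eq] at hmb
    omega
  rw [PySem.List.pyRange_neg_one_eq_reverse]
  rw [show (-1 : Int) + 1 = 0 from by norm_num, show (m - 1) + 1 = m from by ring]
  have hfold :
      ((PySem.List.pyRange 0 m 1).reverse).foldl (fun tb r =>
        (PySem.List.enumerate (PySem.List.pyGetD board r "").toList 0).foldl (fun tb p =>
          PySem.List.pySetD tb p.1 (PySem.List.pyGetD tb p.1 [] ++ [some p.2])) tb)
        (pvEmb (List.replicate n.toNat []))
      = (((PySem.List.pyRange 0 m 1).reverse).map (fun r => PySem.List.pyGetD board r "")).foldl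
          (fun tb s => (PySem.List.enumerate s.toList 0).foldl (fun tb p =>
            PySem.List.pySetD tb p.1 (PySem.List.pyGetD tb p.1 [] ++ [some p.2])) tb)
          (pvEmb (List.replicate n.toNat [])) := by
    rw [List.foldl_map]
  rw [hfold, List.map_reverse, rows_take m board hm hmb2]
  exact outer_emb ((board.take m.toNat).reverse) (List.replicate n.toNat [])

-- A's trans0 is the embedded empty columns
theorem trans0_emb (n : Int) :
    ((PySem.List.pyRange 0 n 1).map (fun _ => ([] : List (Option Char))))
    = pvEmb (List.replicate n.toNat []) := by
  apply List.ext_getElem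
  · simp [pvEmb, PySem.List.length_pyRange_one]
  · intro k h1 h2
    simp [pvEmb]

theorem pvWhileA_false (f : Nat) (b : PvBrd) : pvWhileA f false b = b := by
  cases f <;> rfl

theorem pvStepRes_of_nil (cols : List (List Char)) (h : pvMarked cols = []) :
    pvStepRes cols = cols := by
  unfold pvStepRes pvStep
  rw [h]
  rfl

theorem pvMarked_replicate_nil (k : Nat) : pvMarked (List.replicate k ([] : List Char)) = [] := by
  rw [List.eq_nil_iff_forall_not_mem]
  intro x hx
  rw [mem_pvMarked] at hx
  obtain ⟨r, i, hsq, -, -⟩ := hx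
  have hget : (List.replicate k ([] : List Char)).getD r [] = [] := by
    simp only [List.getD_eq_getElem?_getD, List.getElem?_replicate]
    split_ifs <;> rfl
  unfold pvSq at hsq
  rw [hget] at hsq
  simp at hsq

theorem pvEmb_replicate (k : Nat) : pvEmb (List.replicate k []) = List.replicate k [] := by
  simp [pvEmb]

-- main equality on 0 ≤ m
theorem main_nonneg (m n : Int) (board : List String) (hm : 0 ≤ m)
    (hPre : Pre_solution m n board) : solution m n board = solution_alt m n board := by
  have hinvB := buildCols_inv m n board hm hPre
  simp only [solution, solution_alt]
  rw [trans0_emb n, buildFold_eq m n board hm hPre.1]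
  rw [loop_emb, sum_emb, fuel_emb]
  rw [grid0_eq m n board hm hPre]
  rw [someCount_pad m.toNat _ hinvB.2]
  rw [loopG_model m n m.toNat (by omega) _ _ hinvB (Nat.lt_succ_self _)]
  unfold sumLen
  rfl

-- A's value for m < 0: m * n.toNat; B's: 0
theorem a_neg (m n : Int) (board : List String) (hm : m < 0) :
    solution m n board = (n.toNat : Int) * m := by
  simp only [solution]
  rw [PySem.List.pyRange_neg_one_eq_nil (by omega : (m - 1 : Int) ≤ -1)]
  simp only [List.foldl_nil]
  rw [trans0_emb n, clearBlocks_emb, pvMarked_replicate_nil]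
  rw [show (!(List.isEmpty ([] : List (Int × Int)))) = false from rfl, pvWhileA_false]
  rw [pvStepRes_of_nil _ (pvMarked_replicate_nil _), pvEmb_replicate]
  rw [foldl_add_sum_int]
  simp [List.map_replicate, List.sum_replicate, mul_comm]

theorem b_neg (m n : Int) (board : List String) (hm : m < 0) :
    solution_alt m n board = 0 := by
  simp only [solution_alt]
  rw [PySem.List.pyRange_one_eq_nil (by omega : m ≤ 0)]
  simp only [List.map_nil]
  have hfall : pvFallen [] = [] := by
    unfold pvFallen
    simp [PySem.List.pyRange_one_eq_nil]
  rw [hfall]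
  simp only [List.foldl_nil, Nat.zero_add]
  unfold pvLoopG
  have hhit : pvHit m n [] = [] := by
    unfold pvHit
    rw [PySem.List.pyRange_one_eq_nil (by omega : m - 1 ≤ 0)]
    rfl
  rw [hhit]
  rfl

-- degenerate case m < 0 ∧ n ≤ 0: both return 0
theorem main_degenerate (m n : Int) (board : List String) (hm : m < 0) (hn : n ≤ 0) :
    solution m n board = 0 ∧ solution_alt m n board = 0 := by
  refine ⟨?_, b_neg m n board hm⟩
  rw [a_neg m n board hm]
  have h0 : n.toNat = 0 := by omega
  rw [h0]
  simp


-- ===== VERDICT (by name: the statements are the Claim_ definitions above) =====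
theorem solution_spec : Claim_unchanged_solution := by
  intro m n board _ hPre
  unfold Spec_solution
  intro hnD
  by_cases hm : 0 ≤ m
  · exact main_nonneg m n board hm hPre
  · have hm2 : m < 0 := by omega
    have hn : n ≤ 0 := by
      unfold D_solution at hnD
      by_contra hn
      exact hnD ⟨hm2, by omega⟩
    obtain ⟨h1, h2⟩ := main_degenerate m n board hm2 hn
    rw [h1, h2]

theorem solution_changed : Claim_changed_solution := by
  unfold Claim_changed_solution; decide

theorem solution_tight : Claim_exact_solution := by
  intro m n board _ _ hD
  obtain ⟨hm, hn⟩ := hD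
  rw [a_neg m n board hm, b_neg m n board hm]
  have : 0 < (n.toNat : Int) := by omega
  nlinarith
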